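-- pv_equiv track=rewrite | github.com/GitMonsters/octotetrahedral-agi | arc-puzzle-catalog/solves/619118de/solver.py | transform
-- ===== SOURCE A (Python) =====
-- def transform(grid):
--     from collections import Counter
--
--     rows = len(grid)
--     cols = len(grid[0])
--     flat = [grid[r][c] for r in range(rows) for c in range(cols)]
--     bg = Counter(flat).most_common(1)[0][0]
--
--     # Find separator row or column
--     sep_row = sep_col = None
--     for r in range(rows):
--         vals = set(grid[r])
--         if len(vals) == 1 and grid[r][0] != bg:
--             sep_row = r
--             break
--     if sep_row is None:
--         for c in range(cols):
--             vals = set(grid[r][c] for r in range(rows))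
--             if len(vals) == 1 and grid[0][c] != bg:
--                 sep_col = c
--                 break
--
--     out = [row[:] for row in grid]
--
--     if sep_row is not None:
--         half1 = list(range(0, sep_row))
--         half2 = list(range(sep_row + 1, rows))
--         # Pattern side = side with more distinct non-bg colors
--         def distinct(rng):
--             return len(set(grid[r][c] for r in rng for c in range(cols)) - {bg})
--         if distinct(half1) >= distinct(half2):
--             pat_rows, can_rows = half1, half2
--         else:
--             pat_rows, can_rows = half2, half1
--
--         # Extract pattern bounding box
--         ph = len(pat_rows)
--         non_bg = [(r, c) for r in pat_rows for c in range(cols) if grid[r][c] != bg]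
--         min_c = min(c for _, c in non_bg)
--         max_c = max(c for _, c in non_bg)
--         pw = max_c - min_c + 1
--         if pw < ph:
--             if min_c + ph - 1 < cols:
--                 max_c = min_c + ph - 1
--             else:
--                 min_c = max_c - ph + 1
--             pw = ph
--
--         pattern = [[grid[r][c] for c in range(min_c, min_c + pw)] for r in pat_rows]
--
--         # Find dots on canvas
--         dots = [(r, c) for r in can_rows for c in range(cols) if grid[r][c] != bg]
--
--         # Stamp centered on each dot
--         cr, cc = ph // 2, pw // 2
--         for dr, dc in dots:
--             for pr in range(ph):
--                 for pc in range(pw):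
--                     tr, tc = dr - cr + pr, dc - cc + pc
--                     if 0 <= tr < rows and 0 <= tc < cols:
--                         out[tr][tc] = pattern[pr][pc]
--
--     elif sep_col is not None:
--         half1 = list(range(0, sep_col))
--         half2 = list(range(sep_col + 1, cols))
--         def distinct(crng):
--             return len(set(grid[r][c] for r in range(rows) for c in crng) - {bg})
--         if distinct(half1) >= distinct(half2):
--             pat_cols, can_cols = half1, half2
--         else:
--             pat_cols, can_cols = half2, half1
--
--         pw = len(pat_cols)
--         non_bg = [(r, c) for r in range(rows) for c in pat_cols if grid[r][c] != bg]
--         min_r = min(r for r, _ in non_bg)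
--         max_r = max(r for r, _ in non_bg)
--         ph = max_r - min_r + 1
--         if ph < pw:
--             if min_r + pw - 1 < rows:
--                 max_r = min_r + pw - 1
--             else:
--                 min_r = max_r - pw + 1
--             ph = pw
--
--         pattern = [[grid[r][c] for c in pat_cols] for r in range(min_r, min_r + ph)]
--
--         dots = [(r, c) for r in range(rows) for c in can_cols if grid[r][c] != bg]
--
--         cr, cc = ph // 2, pw // 2
--         for dr, dc in dots:
--             for pr in range(ph):
--                 for pc in range(pw):
--                     tr, tc = dr - cr + pr, dc - cc + pc
--                     if 0 <= tr < rows and 0 <= tc < cols: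
--                         out[tr][tc] = pattern[pr][pc]
--
--     return out
-- ===== SOURCE B (Python) =====
-- def transform(grid):
--     from collections import Counter
--
--     bg = Counter(v for row in grid for v in row).most_common(1)[0][0]
--
--     def uniform(lane):
--         return all(v == lane[0] for v in lane) and lane[0] != bg
--
--     by_row = True
--     lanes = grid
--     sep = next((i for i, lane in enumerate(lanes) if uniform(lane)), None)
--     if sep is None:
--         by_row = False
--         lanes = [[row[k] for row in grid] for k in range(len(grid[0]))]
--         sep = next((i for i, lane in enumerate(lanes) if uniform(lane)), None)
--         if sep is None:
--             return [list(row) for row in grid]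
--
--     first, second = lanes[:sep], lanes[sep + 1:]
--
--     def palette(part):
--         return len({v for lane in part for v in lane if v != bg})
--
--     if palette(first) >= palette(second):
--         pat, c0, c1 = first, sep + 1, len(lanes)
--     else:
--         pat, c0, c1 = second, 0, sep
--
--     n = len(pat)                 # pattern extent along the lane axis
--     m = len(lanes[0])            # length of each lane (cross axis)
--     occ = [k for k in range(m) if any(lane[k] != bg for lane in pat)]
--     lo, hi = occ[0], occ[-1]
--     w = hi - lo + 1
--     if w < n:
--         if lo + n - 1 >= m:
--             lo = hi - n + 1
--         w = n
--
--     dots = [(r, c) for r, row in enumerate(grid) for c, v in enumerate(row)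
--             if v != bg and c0 <= (r if by_row else c) < c1]
--
--     def cell(r, c):
--         u, v = (r, c) if by_row else (c, r)
--         for dr, dc in reversed(dots):
--             du, dv = (dr, dc) if by_row else (dc, dr)
--             a, b = u - du + n // 2, v - dv + w // 2
--             if 0 <= a < n and 0 <= b < w:
--                 return pat[a][lo + b]
--         return grid[r][c]
--
--     return [[cell(r, c) for c in range(len(grid[0]))] for r in range(len(grid))]
-- ===== Notes on version B (the rewrite author's own statement) =====
-- stated objective: alternative
-- what changed: B collapses A's two mirror-image imperative branches into one lane-generic pure pass: it works on a list of lanes (the rows, or the explicitly materialized columns), takes the pattern half as a slice of that list, and builds the output as a per-cell comprehension in which each cell scans the dots in reverse for the last stamp covering it and reads its value directly from the pattern slice - no mutable output copy, no per-dot triple-nested stamping loops, no duplicated row/column branch code; …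
-- outside the precondition, e.g. on transform([[1], [1], [3], [0, 0]]): A returns [[1], [1], [3], [0, 0]], B returns [[1], [1], [3], [0]]
import Mathlib
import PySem

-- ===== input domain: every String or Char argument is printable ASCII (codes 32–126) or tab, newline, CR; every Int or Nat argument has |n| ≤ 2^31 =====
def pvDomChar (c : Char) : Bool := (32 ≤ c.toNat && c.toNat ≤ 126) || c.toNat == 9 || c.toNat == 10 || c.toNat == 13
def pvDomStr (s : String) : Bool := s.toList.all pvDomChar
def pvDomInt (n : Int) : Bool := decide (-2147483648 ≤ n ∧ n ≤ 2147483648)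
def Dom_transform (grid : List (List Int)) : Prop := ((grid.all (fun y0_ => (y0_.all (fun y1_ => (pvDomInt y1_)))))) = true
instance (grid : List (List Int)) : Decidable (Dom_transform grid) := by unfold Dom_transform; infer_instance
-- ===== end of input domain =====

-- B replaces A's two mirror-image imperative branches (copy the grid, stamp the pattern onto a
-- mutable copy with triple-nested loops, once for a row separator and once, transcribed, for a
-- column separator) by ONE lane-generic pure pass: the lanes are the rows, or the explicitly
-- materialized columns; the pattern half is a slice of the lane list; the output is built as a
-- per-cell comprehension in which each cell scans the dots in reverse for the last stamp covering
-- it and reads its value straight from the pattern slice. Objective: alternative (same cost class).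

-- Shared leaf helper (both Pythons contain the identical sub-expression it ports):
-- Counter(flat).most_common(1)[0][0]  (most_common(1) = sorted(items, key=count, reverse=True)[:1])
def bgFromFlat (flat : List Int) : Int :=
  (PySem.List.pyGetD
    (PySem.List.slice (PySem.List.sorted (PySem.Dict.counter flat).items (fun p => p.2) true)
      none (some 1)) 0 ((0 : Int), (0 : Int))).1

-- ===== PORT A =====

-- grid[r][c] with Python index semantics (total form; in-range/wrap inside Pre_)
def gget (g : List (List Int)) (r c : Int) : Int :=
  PySem.List.pyGetD (PySem.List.pyGetD g r []) c 0

-- len(set(grid[r])) == 1 and grid[r][0] != bg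
def condRow (grid : List (List Int)) (bg r : Int) : Bool :=
  decide (PySem.Set.len (PySem.Set.ofList (PySem.List.pyGetD grid r [])) = 1 ∧ gget grid r 0 ≠ bg)

-- len({grid[r][c] for r in range(rows)}) == 1 and grid[0][c] != bg
def condCol (grid : List (List Int)) (bg rows c : Int) : Bool :=
  decide (PySem.Set.len (PySem.Set.ofList ((PySem.List.pyRange 0 rows).map (fun r => gget grid r c))) = 1
    ∧ gget grid 0 c ≠ bg)

-- len({grid[r][c] for r in rng for c in range(cols)} - {bg})
def distinctRows (grid : List (List Int)) (bg cols : Int) (rng : List Int) : Int :=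
  PySem.Set.len (PySem.Set.diff
    (PySem.Set.ofList (rng.flatMap (fun r => (PySem.List.pyRange 0 cols).map (fun c => gget grid r c))))
    (PySem.Set.ofList [bg]))

-- len({grid[r][c] for r in range(rows) for c in crng} - {bg})
def distinctCols (grid : List (List Int)) (bg rows : Int) (crng : List Int) : Int :=
  PySem.Set.len (PySem.Set.diff
    (PySem.Set.ofList ((PySem.List.pyRange 0 rows).flatMap (fun r => crng.map (fun c => gget grid r c))))
    (PySem.Set.ofList [bg]))

-- [(r, c) for r in rng for c in range(cols) if grid[r][c] != bg]
def nonBgRows (grid : List (List Int)) (bg cols : Int) (rng : List Int) : List (Int × Int) :=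
  rng.flatMap (fun r =>
    ((PySem.List.pyRange 0 cols).filter (fun c => gget grid r c != bg)).map (fun c => (r, c)))

-- [(r, c) for r in range(rows) for c in crng if grid[r][c] != bg]
def nonBgCols (grid : List (List Int)) (bg rows : Int) (crng : List Int) : List (Int × Int) :=
  (PySem.List.pyRange 0 rows).flatMap (fun r =>
    (crng.filter (fun c => gget grid r c != bg)).map (fun c => (r, c)))

-- (pat, can) = (half1, half2) if distinct(half1) >= distinct(half2) else (half2, half1)
def halvesRow (grid : List (List Int)) (bg sr rows cols : Int) : List Int × List Int :=
  let half1 := PySem.List.pyRange 0 sr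
  let half2 := PySem.List.pyRange (sr + 1) rows
  if distinctRows grid bg cols half2 ≤ distinctRows grid bg cols half1 then (half1, half2) else (half2, half1)

def halvesCol (grid : List (List Int)) (bg sc rows cols : Int) : List Int × List Int :=
  let half1 := PySem.List.pyRange 0 sc
  let half2 := PySem.List.pyRange (sc + 1) cols
  if distinctCols grid bg rows half2 ≤ distinctCols grid bg rows half1 then (half1, half2) else (half2, half1)

-- the nested stamping loops (identical code in A's two branches): writes pattern into out centered on dot d
def stampA (pattern : List (List Int)) (ph pw cr cc rows cols : Int)
    (out : List (List Int)) (d : Int × Int) : List (List Int) :=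
  (PySem.List.pyRange 0 ph).foldl (fun out pr =>
    (PySem.List.pyRange 0 pw).foldl (fun out pc =>
      -- tr = dr - cr + pr, tc = dc - cc + pc inlined
      if 0 ≤ d.1 - cr + pr ∧ d.1 - cr + pr < rows ∧ 0 ≤ d.2 - cc + pc ∧ d.2 - cc + pc < cols then
        PySem.List.pySetD out (d.1 - cr + pr)
          (PySem.List.pySetD (PySem.List.pyGetD out (d.1 - cr + pr) []) (d.2 - cc + pc) (gget pattern pr pc))
      else out) out) out

def rowBranchA (grid : List (List Int)) (bg sr rows cols : Int) (out0 : List (List Int)) : List (List Int) :=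
  let pc := halvesRow grid bg sr rows cols
  let patRows := pc.1
  let canRows := pc.2
  let ph : Int := PySem.List.len patRows
  let nonBg := nonBgRows grid bg cols patRows
  let minC := (PySem.List.min? (nonBg.map (·.2)) (fun x => x)).getD 0
  let maxC := (PySem.List.max? (nonBg.map (·.2)) (fun x => x)).getD 0
  let pw : Int := maxC - minC + 1
  let fixed := if pw < ph then
      (if minC + ph - 1 < cols then (minC, ph) else (maxC - ph + 1, ph))
    else (minC, pw)
  let minC := fixed.1
  let pw := fixed.2
  let pattern := patRows.map (fun r => (PySem.List.pyRange minC (minC + pw)).map (fun c => gget grid r c))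
  let dots := nonBgRows grid bg cols canRows
  let cr := PySem.Int.floordiv ph 2
  let cc := PySem.Int.floordiv pw 2
  dots.foldl (stampA pattern ph pw cr cc rows cols) out0

def colBranchA (grid : List (List Int)) (bg sc rows cols : Int) (out0 : List (List Int)) : List (List Int) :=
  let pc := halvesCol grid bg sc rows cols
  let patCols := pc.1
  let canCols := pc.2
  let pw : Int := PySem.List.len patCols
  let nonBg := nonBgCols grid bg rows patCols
  let minR := (PySem.List.min? (nonBg.map (·.1)) (fun x => x)).getD 0
  let maxR := (PySem.List.max? (nonBg.map (·.1)) (fun x => x)).getD 0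
  let ph : Int := maxR - minR + 1
  let fixed := if ph < pw then
      (if minR + pw - 1 < rows then (minR, pw) else (maxR - pw + 1, pw))
    else (minR, ph)
  let minR := fixed.1
  let ph := fixed.2
  let pattern := (PySem.List.pyRange minR (minR + ph)).map (fun r => patCols.map (fun c => gget grid r c))
  let dots := nonBgCols grid bg rows canCols
  let cr := PySem.Int.floordiv ph 2
  let cc := PySem.Int.floordiv pw 2
  dots.foldl (stampA pattern ph pw cr cc rows cols) out0

def transform (grid : List (List Int)) : List (List Int) :=
  let rows : Int := PySem.List.len grid
  let cols : Int := PySem.List.len (PySem.List.pyGetD grid 0 [])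
  let flat := (PySem.List.pyRange 0 rows).flatMap (fun r =>
    (PySem.List.pyRange 0 cols).map (fun c => gget grid r c))
  let bg := bgFromFlat flat
  -- for r in range(rows): … break  →  foldl carrying the found value
  let sepRow : Option Int := (PySem.List.pyRange 0 rows).foldl (fun acc r =>
    if acc.isSome then acc else if condRow grid bg r then some r else none) none
  let sepCol : Option Int := match sepRow with
    | some _ => none
    | none => (PySem.List.pyRange 0 cols).foldl (fun acc c =>
        if acc.isSome then acc else if condCol grid bg rows c then some c else none) none
  let out0 := grid.map (fun row => PySem.List.slice row none none)
  match sepRow with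
  | some sr => rowBranchA grid bg sr rows cols out0
  | none => match sepCol with
    | some sc => colBranchA grid bg sc rows cols out0
    | none => out0

-- ===== PORT B =====

-- all(v == lane[0] for v in lane) and lane[0] != bg
def uniformB (bg : Int) (lane : List Int) : Bool :=
  lane.all (fun v => v == PySem.List.pyGetD lane 0 0) && (PySem.List.pyGetD lane 0 0 != bg)

-- [[row[k] for row in grid] for k in range(len(grid[0]))]  (the columns, materialized)
def colLanes (grid : List (List Int)) : List (List Int) :=
  (PySem.List.pyRange 0 (PySem.List.len (PySem.List.pyGetD grid 0 []))).map
    (fun k => grid.map (fun row => PySem.List.pyGetD row k 0))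

-- len({v for lane in part for v in lane if v != bg})
def paletteB (bg : Int) (part : List (List Int)) : Int :=
  PySem.Set.len (PySem.Set.ofList (part.flatMap (fun lane => lane.filter (fun v => v != bg))))

-- [(r, c) for r, row in enumerate(grid) for c, v in enumerate(row)
--         if v != bg and c0 <= (r if by_row else c) < c1]
def dotsB (grid : List (List Int)) (bg : Int) (byRow : Bool) (c0 c1 : Int) : List (Int × Int) :=
  (PySem.List.enumerate grid 0).flatMap (fun rp =>
    ((PySem.List.enumerate rp.2 0).filter (fun cp =>
        cp.2 != bg && decide (c0 ≤ (if byRow then rp.1 else cp.1) ∧ (if byRow then rp.1 else cp.1) < c1))).map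
      (fun cp => (rp.1, cp.1)))

-- B's cell(r, c): scan reversed(dots) for the first stamp covering the cell; read the pattern slice
def cellB (grid pat : List (List Int)) (lo n w : Int) (byRow : Bool)
    (dots : List (Int × Int)) (r c : Int) : Int :=
  match dots.reverse.find? (fun d =>
      decide (0 ≤ (if byRow then r else c) - (if byRow then d.1 else d.2) + PySem.Int.floordiv n 2 ∧
        (if byRow then r else c) - (if byRow then d.1 else d.2) + PySem.Int.floordiv n 2 < n ∧
        0 ≤ (if byRow then c else r) - (if byRow then d.2 else d.1) + PySem.Int.floordiv w 2 ∧
        (if byRow then c else r) - (if byRow then d.2 else d.1) + PySem.Int.floordiv w 2 < w)) with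
  | some d =>
    PySem.List.pyGetD
      (PySem.List.pyGetD pat
        ((if byRow then r else c) - (if byRow then d.1 else d.2) + PySem.Int.floordiv n 2) [])
      (lo + ((if byRow then c else r) - (if byRow then d.2 else d.1) + PySem.Int.floordiv w 2)) 0
  | none => PySem.List.pyGetD (PySem.List.pyGetD grid r []) c 0

-- everything after the separator has been found, generic over the lane axis
def stampB (grid : List (List Int)) (bg : Int) (lanes : List (List Int)) (byRow : Bool)
    (sep : Int) : List (List Int) :=
  let first := PySem.List.slice lanes none (some sep)
  let second := PySem.List.slice lanes (some (sep + 1)) none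
  let pcc := if paletteB bg second ≤ paletteB bg first
    then (first, sep + 1, PySem.List.len lanes) else (second, 0, sep)
  let pat := pcc.1
  let c0 := pcc.2.1
  let c1 := pcc.2.2
  let n : Int := PySem.List.len pat
  let m : Int := PySem.List.len (PySem.List.pyGetD lanes 0 [])
  let occ := (PySem.List.pyRange 0 m).filter (fun k => pat.any (fun lane => PySem.List.pyGetD lane k 0 != bg))
  let lo0 := PySem.List.pyGetD occ 0 0
  let hi := PySem.List.pyGetD occ (-1) 0
  let w0 : Int := hi - lo0 + 1
  let lo := if w0 < n ∧ m ≤ lo0 + n - 1 then hi - n + 1 else lo0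
  let w := if w0 < n then n else w0
  let dots := dotsB grid bg byRow c0 c1
  (PySem.List.pyRange 0 (PySem.List.len grid)).map (fun r =>
    (PySem.List.pyRange 0 (PySem.List.len (PySem.List.pyGetD grid 0 []))).map (fun c =>
      cellB grid pat lo n w byRow dots r c))

def transform_alt (grid : List (List Int)) : List (List Int) :=
  let bg := bgFromFlat (grid.flatMap (fun row => row))
  match (PySem.List.enumerate grid 0).find? (fun p => uniformB bg p.2) with
  | some p => stampB grid bg grid true p.1
  | none =>
    match (PySem.List.enumerate (colLanes grid) 0).find? (fun p => uniformB bg p.2) with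
    | some p => stampB grid bg (colLanes grid) false p.1
    | none => grid.map (fun row => row)

-- ===== PRECONDITION & SPEC =====

-- precondition-only helpers (the occupied cross-axis indices of the pattern half; used by preSep)
def occRow (grid : List (List Int)) (bg cols : Int) (patRows : List Int) : List Int :=
  (PySem.List.pyRange 0 cols).filter (fun c => patRows.any (fun r => gget grid r c != bg))

def occCol (grid : List (List Int)) (bg rows : Int) (patCols : List Int) : List Int :=
  (PySem.List.pyRange 0 rows).filter (fun r => patCols.any (fun c => gget grid r c != bg))

-- Bool check used by Pre_: when a separator exists, the chosen pattern half must contain a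
-- non-bg cell (else A's min() raises ValueError) and the pw<ph / ph<pw re-centering must not
-- push the leading index below -cols / -rows (else A's negative indexing raises IndexError).
def preSep (grid : List (List Int)) : Bool :=
  let rows : Int := PySem.List.len grid
  let cols : Int := PySem.List.len (PySem.List.pyGetD grid 0 [])
  let bg := bgFromFlat (grid.flatMap (fun row => row))
  match (PySem.List.pyRange 0 rows).find? (condRow grid bg) with
  | some sr =>
    let patRows := (halvesRow grid bg sr rows cols).1
    let ph : Int := PySem.List.len patRows
    let occ := occRow grid bg cols patRows
    let minC := PySem.List.pyGetD occ 0 0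
    let maxC := PySem.List.pyGetD occ (-1) 0
    !occ.isEmpty && !(decide (maxC - minC + 1 < ph ∧ cols ≤ minC + ph - 1 ∧ maxC - ph + 1 < -cols))
  | none =>
    match (PySem.List.pyRange 0 cols).find? (condCol grid bg rows) with
    | some sc =>
      let patCols := (halvesCol grid bg sc rows cols).1
      let pw : Int := PySem.List.len patCols
      let occ := occCol grid bg rows patCols
      let minR := PySem.List.pyGetD occ 0 0
      let maxR := PySem.List.pyGetD occ (-1) 0
      !occ.isEmpty && !(decide (maxR - minR + 1 < pw ∧ rows ≤ minR + pw - 1 ∧ maxR - pw + 1 < -rows))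
    | none => true

-- Pre_ excludes: the empty grid / empty first row (A raises IndexError), non-rectangular grids
-- (rows shorter than the first raise IndexError; on longer rows A returns its ragged input with
-- the overhang copied untouched — an artefact of mutating row copies — while B returns the
-- rows×cols rectangle), and grids where a separator's chosen pattern half is entirely background
-- or the re-centering fixup runs past Python's negative-index range (A raises there).
def Pre_transform (grid : List (List Int)) : Prop :=
  grid ≠ [] ∧ PySem.List.pyGetD grid 0 [] ≠ [] ∧
  (∀ row ∈ grid, row.length = (PySem.List.pyGetD grid 0 []).length) ∧
  preSep grid = true
instance (grid : List (List Int)) : Decidable (Pre_transform grid) := by unfold Pre_transform; infer_instance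

def pvWitness_transform : List (List Int) := [[0, 0, 0], [1, 1, 1], [0, 2, 0]]

def Spec_transform (grid : List (List Int)) (out : List (List Int)) : Prop := out = transform_alt grid
instance (grid : List (List Int)) (out : List (List Int)) : Decidable (Spec_transform grid out) := by unfold Spec_transform; infer_instance

-- ===== CLAIM (what is proved, stated in full; the proofs are below) =====
def Claim_equal_transform : Prop := ∀ (grid : List (List Int)), Dom_transform grid → Pre_transform grid → Spec_transform grid (transform grid)

-- ===== LEMMAS AND PROOFS =====

-- out has R rows, each of length C
def pvShape (out : List (List Int)) (R C : Nat) : Prop :=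
  out.length = R ∧ ∀ row ∈ out, row.length = C

theorem pvShape_foldl {β : Type} (R C : Nat) (f : List (List Int) → β → List (List Int))
    (l : List β) (out : List (List Int))
    (hf : ∀ o b, pvShape o R C → pvShape (f o b) R C) (h : pvShape out R C) :
    pvShape (l.foldl f out) R C := by
  induction l generalizing out with
  | nil => exact h
  | cons b t ih => exact ih _ (hf _ _ h)

theorem pvGget_natCast (out : List (List Int)) (i j : Nat) :
    gget out (↑i) (↑j) = (out.getD i []).getD j 0 := by
  simp [gget]

theorem pvFoldlBreak {α : Type} (l : List α) (p : α → Bool) :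
    l.foldl (fun acc x =>
      if acc.isSome then acc else if p x then some x else none) none = l.find? p := by
  induction l with
  | nil => rfl
  | cons x t ih =>
    by_cases hx : p x
    · have haux : ∀ (l' : List α) (y : α), l'.foldl (fun acc x =>
          if acc.isSome then acc else if p x then some x else none) (some y) = some y := by
        intro l' y
        induction l' with
        | nil => rfl
        | cons a t' ih' => simpa using ih'
      simp [hx, haux]
    · simp [hx, ih]

theorem pvOut0 (grid : List (List Int)) :
    grid.map (fun row => PySem.List.slice row none none) = grid := by
  simp [PySem.List.slice_none_none]

theorem pvRowEq (grid : List (List Int)) (C : Nat) (hrect : ∀ row ∈ grid, row.length = C)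
    (r : Nat) (hr : r < grid.length) :
    (PySem.List.pyRange 0 (↑C)).map (fun c => gget grid (↑r) c) = grid[r] := by
  have hlen : grid[r].length = C := hrect _ (List.getElem_mem hr)
  apply List.ext_getElem
  · simp [PySem.List.length_pyRange_one, hlen]
  · intro k hk1 hk2
    have hkC : k < C := hlen ▸ hk2
    simp only [List.getElem_map, PySem.List.getElem_pyRange_one, zero_add]
    rw [pvGget_natCast, List.getD_eq_getElem _ _ hr, List.getD_eq_getElem _ _ (by omega)]

theorem pvFlatAux (g : List (List Int)) (f : Nat → List Int)
    (hf : ∀ r (hr : r < g.length), f r = g[r]) :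
    (List.range g.length).flatMap f = g.flatMap (fun row => row) := by
  induction g using List.reverseRecOn with
  | nil => simp
  | append_singleton g row ih =>
    have hlen : (g ++ [row]).length = g.length + 1 := by simp
    rw [hlen, List.range_succ, List.flatMap_append, List.flatMap_append]
    have h1 : (List.range g.length).flatMap f = g.flatMap (fun row => row) := by
      apply ih
      intro r hr
      rw [hf r (by simp; omega), List.getElem_append_left hr]
    have h2 : f g.length = row := by
      rw [hf g.length (by simp)]
      simp
    simp [h1, h2]

theorem pvFlatEq (grid : List (List Int)) (C : Nat) (hrect : ∀ row ∈ grid, row.length = C) :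
    (PySem.List.pyRange 0 (↑grid.length)).flatMap (fun r =>
      (PySem.List.pyRange 0 (↑C)).map (fun c => gget grid r c)) = grid.flatMap (fun row => row) := by
  have h1 : PySem.List.pyRange 0 (↑grid.length) = (List.range grid.length).map (fun k => ((k : Nat) : Int)) := by
    rw [PySem.List.pyRange_one]
    simp only [Int.sub_zero, Int.toNat_natCast]
    exact List.map_congr_left (fun a ha => by omega)
  rw [h1, List.flatMap_map]
  exact pvFlatAux grid (fun k => (PySem.List.pyRange 0 (↑C)).map (fun c => gget grid (↑k) c))
    (fun r hr => pvRowEq grid C hrect r hr)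

theorem pvPairwiseLast (occ : List Int) (h : occ.Pairwise (· < ·)) (hne : occ ≠ []) :
    ∀ b ∈ occ, b ≤ occ.getLast hne := by
  induction occ with
  | nil => simp
  | cons a t ih =>
    intro b hb
    rcases t with _ | ⟨c, t'⟩
    · simp at hb; simp [hb]
    · have hrel : ∀ x ∈ c :: t', a < x := (List.pairwise_cons.mp h).1
      have hp' : (c :: t').Pairwise (· < ·) := (List.pairwise_cons.mp h).2
      have hlast : (a :: c :: t').getLast hne = (c :: t').getLast (by simp) := by
        simp [List.getLast_cons]
      rw [hlast]
      rcases List.mem_cons.mp hb with rfl | hb'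
      · exact le_of_lt (hrel _ (List.getLast_mem _))
      · exact ih hp' (by simp) _ hb'

theorem pvMinHead (xs occ : List Int) (hmem : ∀ x, x ∈ xs ↔ x ∈ occ)
    (hp : occ.Pairwise (· < ·)) :
    (PySem.List.min? xs (fun x => x)).getD 0 = PySem.List.pyGetD occ 0 0 := by
  rcases hocc : occ with _ | ⟨a, t⟩
  · subst hocc
    have hxs : xs = [] := List.eq_nil_iff_forall_not_mem.mpr
      (fun x hx => by simpa using (hmem x).mp hx)
    subst hxs
    rfl
  · subst hocc
    have hne : xs ≠ [] := by
      intro h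
      have : a ∈ xs := (hmem a).mpr (by simp)
      simp [h] at this
    obtain ⟨m, hm⟩ : ∃ m, PySem.List.min? xs (fun x => x) = some m := by
      cases h : PySem.List.min? xs (fun x => x) with
      | none => exact absurd ((PySem.List.min?_eq_none_iff _ _).mp h) hne
      | some m => exact ⟨m, rfl⟩
    have hmmem : m ∈ a :: t := (hmem m).mp (PySem.List.min?_mem hm)
    have hma : m ≤ a := PySem.List.min?_isMin hm a ((hmem a).mpr (by simp))
    have ham : a ≤ m := by
      rcases List.mem_cons.mp hmmem with rfl | hmt
      · exact le_refl _
      · exact le_of_lt ((List.pairwise_cons.mp hp).1 m hmt)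
    rw [hm, PySem.List.pyGetD_zero_cons]
    simpa using le_antisymm hma ham

theorem pvMaxLast (xs occ : List Int) (hmem : ∀ x, x ∈ xs ↔ x ∈ occ)
    (hp : occ.Pairwise (· < ·)) :
    (PySem.List.max? xs (fun x => x)).getD 0 = PySem.List.pyGetD occ (-1) 0 := by
  rcases hocc : occ with _ | ⟨a, t⟩
  · subst hocc
    have hxs : xs = [] := List.eq_nil_iff_forall_not_mem.mpr
      (fun x hx => by simpa using (hmem x).mp hx)
    subst hxs
    rfl
  · subst hocc
    have hne : xs ≠ [] := by
      intro h
      have : a ∈ xs := (hmem a).mpr (by simp)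
      simp [h] at this
    obtain ⟨m, hm⟩ : ∃ m, PySem.List.max? xs (fun x => x) = some m := by
      cases h : PySem.List.max? xs (fun x => x) with
      | none => exact absurd ((PySem.List.max?_eq_none_iff _ _).mp h) hne
      | some m => exact ⟨m, rfl⟩
    have hmmem : m ∈ a :: t := (hmem m).mp (PySem.List.max?_mem hm)
    have h1 : (a :: t).getLast (by simp) ≤ m :=
      PySem.List.max?_isMax hm _ ((hmem _).mpr (List.getLast_mem _))
    have h2 : m ≤ (a :: t).getLast (by simp) := pvPairwiseLast _ hp (by simp) m hmmem
    rw [hm, PySem.List.pyGetD_neg_one _ _ (by simp)]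
    simpa using le_antisymm h2 h1

theorem pvMemNonBgRow (grid : List (List Int)) (bg : Int) (C : Nat) (rng : List Int) (x : Int) :
    x ∈ (nonBgRows grid bg (↑C) rng).map (·.2) ↔ x ∈ occRow grid bg (↑C) rng := by
  unfold nonBgRows occRow
  constructor
  · intro hxm
    simp only [List.mem_map, List.mem_flatMap, List.mem_filter, bne_iff_ne] at hxm
    obtain ⟨a, ⟨r, hr, c, ⟨hc1, hc2⟩, heq⟩, hx⟩ := hxm
    cases heq; cases hx
    simp only [List.mem_filter, List.any_eq_true, bne_iff_ne]
    exact ⟨hc1, r, hr, hc2⟩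
  · intro hxo
    simp only [List.mem_filter, List.any_eq_true, bne_iff_ne] at hxo
    obtain ⟨hx, r, hr, hne⟩ := hxo
    simp only [List.mem_map, List.mem_flatMap, List.mem_filter, bne_iff_ne]
    exact ⟨(r, x), ⟨r, hr, x, ⟨hx, hne⟩, rfl⟩, rfl⟩

theorem pvMemNonBgCol (grid : List (List Int)) (bg : Int) (R : Nat) (crng : List Int) (x : Int) :
    x ∈ (nonBgCols grid bg (↑R) crng).map (·.1) ↔ x ∈ occCol grid bg (↑R) crng := by
  unfold nonBgCols occCol
  constructor
  · intro hxm
    simp only [List.mem_map, List.mem_flatMap, List.mem_filter, bne_iff_ne] at hxm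
    obtain ⟨a, ⟨r, hr, c, ⟨hc1, hc2⟩, heq⟩, hx⟩ := hxm
    cases heq; cases hx
    simp only [List.mem_filter, List.any_eq_true, bne_iff_ne]
    exact ⟨hr, c, hc1, hc2⟩
  · intro hxo
    simp only [List.mem_filter, List.any_eq_true, bne_iff_ne] at hxo
    obtain ⟨hx, c, hc, hne⟩ := hxo
    simp only [List.mem_map, List.mem_flatMap, List.mem_filter, bne_iff_ne]
    exact ⟨(x, c), ⟨x, hx, c, ⟨hc, hne⟩, rfl⟩, rfl⟩

theorem pvOccRowPairwise (grid : List (List Int)) (bg : Int) (C : Nat) (rng : List Int) :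
    (occRow grid bg (↑C) rng).Pairwise (· < ·) := by
  exact (PySem.List.pairwise_lt_pyRange_one 0 (↑C)).filter _

theorem pvOccColPairwise (grid : List (List Int)) (bg : Int) (R : Nat) (crng : List Int) :
    (occCol grid bg (↑R) crng).Pairwise (· < ·) := by
  exact (PySem.List.pairwise_lt_pyRange_one 0 (↑R)).filter _

theorem pvGgetWrite (out : List (List Int)) (R C : Nat) (h : pvShape out R C)
    (tr tc : Int) (htr0 : 0 ≤ tr) (htr : tr < (↑R : Int)) (htc0 : 0 ≤ tc) (_htc : tc < (↑C : Int))
    (v : Int) (i j : Nat) (hi : i < R) (hj : j < C) :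
    gget (PySem.List.pySetD out tr (PySem.List.pySetD (PySem.List.pyGetD out tr []) tc v)) (↑i) (↑j)
      = if ((↑i : Int) = tr ∧ (↑j : Int) = tc) then v else gget out (↑i) (↑j) := by
  obtain ⟨hlen, hrows⟩ := h
  have htR : tr.toNat < out.length := by omega
  have hiR : i < out.length := by omega
  have hrow : PySem.List.pyGetD out tr [] = out[tr.toNat] :=
    PySem.List.pyGetD_eq_getElem _ _ htr0 (by omega)
  have hrowlen : out[tr.toNat].length = C := hrows _ (List.getElem_mem htR)
  rw [hrow, PySem.List.pySetD_of_nonneg _ _ htc0, PySem.List.pySetD_of_nonneg _ _ htr0,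
    pvGget_natCast, pvGget_natCast]
  rw [List.getD_eq_getElem (out.set tr.toNat (out[tr.toNat].set tc.toNat v)) []
    (by simpa using hiR), List.getElem_set]
  by_cases hit : tr.toNat = i
  · subst hit
    have hcond1 : (↑tr.toNat : Int) = tr := by omega
    rw [if_pos rfl, List.getD_eq_getElem (out[tr.toNat].set tc.toNat v) 0
      (by simpa [hrowlen] using hj), List.getElem_set]
    by_cases hjt : tc.toNat = j
    · subst hjt
      have hcond2 : (↑tc.toNat : Int) = tc := by omega
      rw [if_pos rfl, if_pos ⟨hcond1, hcond2⟩]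
    · have hcond2 : ¬((↑j : Int) = tc) := by omega
      rw [if_neg hjt, if_neg (by tauto : ¬((↑tr.toNat : Int) = tr ∧ (↑j : Int) = tc))]
      rw [List.getD_eq_getElem out [] hiR, List.getD_eq_getElem out[tr.toNat] 0 (by omega)]
  · have hcond1 : ¬((↑i : Int) = tr) := by omega
    rw [if_neg hit, if_neg (by tauto : ¬((↑i : Int) = tr ∧ (↑j : Int) = tc))]
    rw [List.getD_eq_getElem out [] hiR]

theorem pvWriteShape (out : List (List Int)) (R C : Nat) (h : pvShape out R C)
    (tr tc : Int) (htr0 : 0 ≤ tr) (htr : tr < (↑R : Int)) (v : Int) :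
    pvShape (PySem.List.pySetD out tr (PySem.List.pySetD (PySem.List.pyGetD out tr []) tc v)) R C := by
  obtain ⟨hlen, hrows⟩ := h
  constructor
  · rw [PySem.List.pySetD_of_nonneg _ _ htr0]
    simp [hlen]
  · intro row hrow
    rw [PySem.List.pySetD_of_nonneg _ _ htr0] at hrow
    rcases List.mem_or_eq_of_mem_set hrow with hmem | rfl
    · exact hrows _ hmem
    · rw [PySem.List.length_pySetD]
      have htR : tr.toNat < out.length := by omega
      have hpg : PySem.List.pyGetD out tr [] = out[tr.toNat] :=
        PySem.List.pyGetD_eq_getElem _ _ htr0 (by omega)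
      rw [hpg]
      exact hrows _ (List.getElem_mem htR)

theorem pvInnerShape (pattern : List (List Int)) (cr cc : Int) (R C : Nat) (d : Int × Int) (pr : Int)
    (l : List Int) (out : List (List Int)) (h : pvShape out R C) :
    pvShape (l.foldl (fun out pc =>
        if 0 ≤ d.1 - cr + pr ∧ d.1 - cr + pr < (↑R : Int) ∧ 0 ≤ d.2 - cc + pc ∧ d.2 - cc + pc < (↑C : Int) then
          PySem.List.pySetD out (d.1 - cr + pr)
            (PySem.List.pySetD (PySem.List.pyGetD out (d.1 - cr + pr) []) (d.2 - cc + pc) (gget pattern pr pc))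
        else out) out) R C := by
  apply pvShape_foldl _ _ _ _ _ _ h
  intro o pc ho
  split
  · next hcond => exact pvWriteShape o R C ho _ _ hcond.1 hcond.2.1 _
  · exact ho

theorem pvInnerGet (pattern : List (List Int)) (cr cc : Int) (R C : Nat) (d : Int × Int) (pr : Int)
    (w : Nat) (out : List (List Int)) (h : pvShape out R C)
    (i j : Nat) (hi : i < R) (hj : j < C) :
    gget ((PySem.List.pyRange 0 (↑w)).foldl (fun out pc =>
        if 0 ≤ d.1 - cr + pr ∧ d.1 - cr + pr < (↑R : Int) ∧ 0 ≤ d.2 - cc + pc ∧ d.2 - cc + pc < (↑C : Int) then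
          PySem.List.pySetD out (d.1 - cr + pr)
            (PySem.List.pySetD (PySem.List.pyGetD out (d.1 - cr + pr) []) (d.2 - cc + pc) (gget pattern pr pc))
        else out) out) (↑i) (↑j)
      = if (d.1 - cr + pr = (↑i : Int) ∧ 0 ≤ (↑j : Int) - d.2 + cc ∧ (↑j : Int) - d.2 + cc < (↑w : Int))
        then gget pattern pr ((↑j : Int) - d.2 + cc) else gget out (↑i) (↑j) := by
  induction w generalizing out with
  | zero =>
    rw [show ((0 : Nat) : Int) = 0 from rfl,
      show PySem.List.pyRange 0 (0 : Int) = [] from by simp]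
    rw [List.foldl_nil, if_neg (by omega)]
  | succ w ih =>
    have hrange : PySem.List.pyRange 0 ((↑(w + 1) : Int)) = PySem.List.pyRange 0 (↑w) ++ [(↑w : Int)] := by
      push_cast
      exact PySem.List.pyRange_one_succ_right (by positivity)
    rw [hrange]
    simp only [List.foldl_append, List.foldl_cons, List.foldl_nil]
    have hM : pvShape ((PySem.List.pyRange 0 (↑w : Int)).foldl (fun out pc =>
        if 0 ≤ d.1 - cr + pr ∧ d.1 - cr + pr < (↑R : Int) ∧ 0 ≤ d.2 - cc + pc ∧ d.2 - cc + pc < (↑C : Int) then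
          PySem.List.pySetD out (d.1 - cr + pr)
            (PySem.List.pySetD (PySem.List.pyGetD out (d.1 - cr + pr) []) (d.2 - cc + pc) (gget pattern pr pc))
        else out) out) R C := pvInnerShape pattern cr cc R C d pr _ out h
    by_cases hg : 0 ≤ d.1 - cr + pr ∧ d.1 - cr + pr < (↑R : Int) ∧ 0 ≤ d.2 - cc + (↑w : Int) ∧ d.2 - cc + (↑w : Int) < (↑C : Int)
    · rw [if_pos hg, pvGgetWrite _ R C hM _ _ hg.1 hg.2.1 hg.2.2.1 hg.2.2.2 _ i j hi hj, ih out h]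
      by_cases h1 : (↑i : Int) = d.1 - cr + pr ∧ (↑j : Int) = d.2 - cc + (↑w : Int)
      · rw [if_pos h1, if_pos (by push_cast; constructor <;> omega :
          d.1 - cr + pr = (↑i : Int) ∧ 0 ≤ (↑j : Int) - d.2 + cc ∧ (↑j : Int) - d.2 + cc < (↑(w + 1) : Int))]
        have hjw : (↑j : Int) - d.2 + cc = (↑w : Int) := by omega
        rw [hjw]
      · rw [if_neg h1]
        by_cases h2 : d.1 - cr + pr = (↑i : Int) ∧ 0 ≤ (↑j : Int) - d.2 + cc ∧ (↑j : Int) - d.2 + cc < (↑w : Int)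
        · rw [if_pos h2, if_pos (by refine ⟨h2.1, h2.2.1, by push_cast; omega⟩)]
        · rw [if_neg h2, if_neg ?_]
          intro hc
          rcases hc with ⟨e1, e2, e3⟩
          by_cases hw : (↑j : Int) - d.2 + cc = (↑w : Int)
          · exact h1 ⟨by omega, by omega⟩
          · exact h2 ⟨e1, e2, by push_cast at e3; omega⟩
    · rw [if_neg hg, ih out h]
      by_cases h2 : d.1 - cr + pr = (↑i : Int) ∧ 0 ≤ (↑j : Int) - d.2 + cc ∧ (↑j : Int) - d.2 + cc < (↑w : Int)
      · rw [if_pos h2, if_pos (by refine ⟨h2.1, h2.2.1, by push_cast; omega⟩)]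
      · rw [if_neg h2, if_neg ?_]
        intro hc
        rcases hc with ⟨e1, e2, e3⟩
        by_cases hw : (↑j : Int) - d.2 + cc = (↑w : Int)
        · exact hg ⟨by omega, by omega, by omega, by omega⟩
        · exact h2 ⟨e1, e2, by push_cast at e3; omega⟩

theorem pvStampShape (pattern : List (List Int)) (ph pw cr cc : Int) (R C : Nat)
    (out : List (List Int)) (d : Int × Int) (h : pvShape out R C) :
    pvShape (stampA pattern ph pw cr cc (↑R) (↑C) out d) R C := by
  unfold stampA
  apply pvShape_foldl _ _ _ _ _ _ h
  intro o pr ho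
  exact pvInnerShape pattern cr cc R C d pr _ o ho

theorem pvOuterGet (pattern : List (List Int)) (pw cr cc : Int) (hpw : 0 ≤ pw)
    (R C : Nat) (d : Int × Int) (hN : Nat) (out : List (List Int)) (h : pvShape out R C)
    (i j : Nat) (hi : i < R) (hj : j < C) :
    gget ((PySem.List.pyRange 0 (↑hN)).foldl (fun out pr =>
        (PySem.List.pyRange 0 pw).foldl (fun out pc =>
          if 0 ≤ d.1 - cr + pr ∧ d.1 - cr + pr < (↑R : Int) ∧ 0 ≤ d.2 - cc + pc ∧ d.2 - cc + pc < (↑C : Int) then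
            PySem.List.pySetD out (d.1 - cr + pr)
              (PySem.List.pySetD (PySem.List.pyGetD out (d.1 - cr + pr) []) (d.2 - cc + pc) (gget pattern pr pc))
          else out) out) out) (↑i) (↑j)
      = if (0 ≤ (↑i : Int) - d.1 + cr ∧ (↑i : Int) - d.1 + cr < (↑hN : Int) ∧
            0 ≤ (↑j : Int) - d.2 + cc ∧ (↑j : Int) - d.2 + cc < pw)
        then gget pattern ((↑i : Int) - d.1 + cr) ((↑j : Int) - d.2 + cc)
        else gget out (↑i) (↑j) := by
  obtain ⟨pwn, rfl⟩ : ∃ n : Nat, pw = (↑n : Int) := ⟨pw.toNat, (Int.toNat_of_nonneg hpw).symm⟩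
  induction hN generalizing out with
  | zero =>
    rw [show ((0 : Nat) : Int) = 0 from rfl,
      show PySem.List.pyRange 0 (0 : Int) = [] from by simp]
    rw [List.foldl_nil, if_neg (by omega)]
  | succ n ih =>
    have hrange : PySem.List.pyRange 0 ((↑(n + 1) : Int)) = PySem.List.pyRange 0 (↑n) ++ [(↑n : Int)] := by
      push_cast
      exact PySem.List.pyRange_one_succ_right (by positivity)
    rw [hrange]
    simp only [List.foldl_append, List.foldl_cons, List.foldl_nil]
    have hM : pvShape ((PySem.List.pyRange 0 (↑n : Int)).foldl (fun out pr =>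
        (PySem.List.pyRange 0 (↑pwn : Int)).foldl (fun out pc =>
          if 0 ≤ d.1 - cr + pr ∧ d.1 - cr + pr < (↑R : Int) ∧ 0 ≤ d.2 - cc + pc ∧ d.2 - cc + pc < (↑C : Int) then
            PySem.List.pySetD out (d.1 - cr + pr)
              (PySem.List.pySetD (PySem.List.pyGetD out (d.1 - cr + pr) []) (d.2 - cc + pc) (gget pattern pr pc))
          else out) out) out) R C := by
      apply pvShape_foldl _ _ _ _ _ _ h
      intro o pr ho
      exact pvInnerShape pattern cr cc R C d pr _ o ho
    rw [pvInnerGet pattern cr cc R C d (↑n) pwn _ hM i j hi hj, ih out h]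
    by_cases h1 : d.1 - cr + (↑n : Int) = (↑i : Int) ∧ 0 ≤ (↑j : Int) - d.2 + cc ∧ (↑j : Int) - d.2 + cc < (↑pwn : Int)
    · rw [if_pos h1, if_pos (by refine ⟨by omega, by push_cast; omega, h1.2.1, h1.2.2⟩)]
      have hin : (↑i : Int) - d.1 + cr = (↑n : Int) := by omega
      rw [hin]
    · rw [if_neg h1]
      by_cases h2 : 0 ≤ (↑i : Int) - d.1 + cr ∧ (↑i : Int) - d.1 + cr < (↑n : Int) ∧ 0 ≤ (↑j : Int) - d.2 + cc ∧ (↑j : Int) - d.2 + cc < (↑pwn : Int)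
      · rw [if_pos h2, if_pos (by refine ⟨h2.1, by push_cast; omega, h2.2.2.1, h2.2.2.2⟩)]
      · rw [if_neg h2, if_neg ?_]
        intro hc
        rcases hc with ⟨e1, e2, e3, e4⟩
        by_cases hn : (↑i : Int) - d.1 + cr = (↑n : Int)
        · exact h1 ⟨by omega, e3, e4⟩
        · exact h2 ⟨e1, by push_cast at e2 ⊢; omega, e3, e4⟩

theorem pvStampGet (pattern : List (List Int)) (ph pw cr cc : Int) (hph : 0 ≤ ph) (hpw : 0 ≤ pw)
    (R C : Nat) (out : List (List Int)) (d : Int × Int) (h : pvShape out R C)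
    (i j : Nat) (hi : i < R) (hj : j < C) :
    gget (stampA pattern ph pw cr cc (↑R) (↑C) out d) (↑i) (↑j)
      = if (0 ≤ (↑i : Int) - d.1 + cr ∧ (↑i : Int) - d.1 + cr < ph ∧
            0 ≤ (↑j : Int) - d.2 + cc ∧ (↑j : Int) - d.2 + cc < pw)
        then gget pattern ((↑i : Int) - d.1 + cr) ((↑j : Int) - d.2 + cc)
        else gget out (↑i) (↑j) := by
  obtain ⟨n, rfl⟩ : ∃ n : Nat, ph = (↑n : Int) := ⟨ph.toNat, (Int.toNat_of_nonneg hph).symm⟩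
  unfold stampA
  exact pvOuterGet pattern pw cr cc hpw R C d n out h i j hi hj

theorem pvStampAllGet (pattern : List (List Int)) (ph pw cr cc : Int) (hph : 0 ≤ ph) (hpw : 0 ≤ pw)
    (R C : Nat) (dots : List (Int × Int)) (out : List (List Int)) (h : pvShape out R C)
    (i j : Nat) (hi : i < R) (hj : j < C) :
    gget (dots.foldl (stampA pattern ph pw cr cc (↑R) (↑C)) out) (↑i) (↑j)
      = (match dots.reverse.find? (fun d =>
            decide (0 ≤ (↑i : Int) - d.1 + cr ∧ (↑i : Int) - d.1 + cr < ph ∧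
              0 ≤ (↑j : Int) - d.2 + cc ∧ (↑j : Int) - d.2 + cc < pw)) with
        | some d => gget pattern ((↑i : Int) - d.1 + cr) ((↑j : Int) - d.2 + cc)
        | none => gget out (↑i) (↑j)) := by
  induction dots using List.reverseRecOn with
  | nil => simp
  | append_singleton ds d' ih =>
    rw [List.foldl_append, List.foldl_cons, List.foldl_nil]
    have hM : pvShape (ds.foldl (stampA pattern ph pw cr cc (↑R) (↑C)) out) R C := by
      apply pvShape_foldl _ _ _ _ _ _ h
      intro o b ho
      exact pvStampShape pattern ph pw cr cc R C o b ho
    rw [pvStampGet pattern ph pw cr cc hph hpw R C _ d' hM i j hi hj]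
    rw [List.reverse_append, List.reverse_singleton, List.singleton_append]
    by_cases hp : (0 ≤ (↑i : Int) - d'.1 + cr ∧ (↑i : Int) - d'.1 + cr < ph ∧
        0 ≤ (↑j : Int) - d'.2 + cc ∧ (↑j : Int) - d'.2 + cc < pw)
    · rw [if_pos hp, List.find?_cons_of_pos (by simpa using hp)]
    · rw [if_neg hp, List.find?_cons_of_neg (by simpa using hp), ih]

theorem pvPatRowLookup (grid : List (List Int)) (patRows : List Int) (minC pw : Int)
    (pr pc : Int) (hpr0 : 0 ≤ pr) (hpr : pr < (↑patRows.length : Int)) (hpc0 : 0 ≤ pc) (hpc : pc < pw) :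
    gget (patRows.map (fun r => (PySem.List.pyRange minC (minC + pw)).map (fun c => gget grid r c))) pr pc
      = gget grid (PySem.List.pyGetD patRows pr 0) (minC + pc) := by
  obtain ⟨prn, rfl⟩ : ∃ n : Nat, pr = (↑n : Int) := ⟨pr.toNat, (Int.toNat_of_nonneg hpr0).symm⟩
  obtain ⟨pcn, rfl⟩ : ∃ n : Nat, pc = (↑n : Int) := ⟨pc.toNat, (Int.toNat_of_nonneg hpc0).symm⟩
  have hprn : prn < patRows.length := by omega
  simp only [gget]
  rw [PySem.List.pyGetD_natCast (patRows.map _),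
    List.getD_eq_getElem (patRows.map _) [] (by simpa using hprn), List.getElem_map,
    PySem.List.pyGetD_map_pyRange_one _ minC (minC + pw) pcn 0 (by omega),
    PySem.List.pyGetD_natCast patRows, List.getD_eq_getElem patRows 0 hprn]

theorem pvPatColLookup (grid : List (List Int)) (patCols : List Int) (minR ph : Int)
    (pr pc : Int) (hpr0 : 0 ≤ pr) (hpr : pr < ph) (hpc0 : 0 ≤ pc) (hpc : pc < (↑patCols.length : Int)) :
    gget ((PySem.List.pyRange minR (minR + ph)).map (fun r => patCols.map (fun c => gget grid r c))) pr pc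
      = gget grid (minR + pr) (PySem.List.pyGetD patCols pc 0) := by
  obtain ⟨prn, rfl⟩ : ∃ n : Nat, pr = (↑n : Int) := ⟨pr.toNat, (Int.toNat_of_nonneg hpr0).symm⟩
  obtain ⟨pcn, rfl⟩ : ∃ n : Nat, pc = (↑n : Int) := ⟨pc.toNat, (Int.toNat_of_nonneg hpc0).symm⟩
  have hpcn : pcn < patCols.length := by omega
  simp only [gget]
  rw [PySem.List.pyGetD_map_pyRange_one _ minR (minR + ph) prn [] (by omega),
    PySem.List.pyGetD_natCast (patCols.map _),
    List.getD_eq_getElem (patCols.map _) 0 (by simpa using hpcn), List.getElem_map,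
    PySem.List.pyGetD_natCast patCols, List.getD_eq_getElem patCols 0 hpcn]

theorem pvGatherEq (pattern : List (List Int)) (ph pw cr cc : Int) (hph : 0 ≤ ph) (hpw : 0 ≤ pw)
    (grid : List (List Int)) (C : Nat) (hrect : ∀ row ∈ grid, row.length = C)
    (dots : List (Int × Int)) (cell : Int → Int → Int)
    (hcell : ∀ (i j : Nat), i < grid.length → j < C →
      cell (↑i) (↑j) = (match dots.reverse.find? (fun d =>
          decide (0 ≤ (↑i : Int) - d.1 + cr ∧ (↑i : Int) - d.1 + cr < ph ∧
            0 ≤ (↑j : Int) - d.2 + cc ∧ (↑j : Int) - d.2 + cc < pw)) with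
        | some d => gget pattern ((↑i : Int) - d.1 + cr) ((↑j : Int) - d.2 + cc)
        | none => gget grid (↑i) (↑j))) :
    dots.foldl (stampA pattern ph pw cr cc (↑grid.length) (↑C)) grid
      = (PySem.List.pyRange 0 (↑grid.length)).map (fun r =>
          (PySem.List.pyRange 0 (↑C)).map (fun c => cell r c)) := by
  have hsh : pvShape grid grid.length C := ⟨rfl, hrect⟩
  have hshape : pvShape (dots.foldl (stampA pattern ph pw cr cc (↑grid.length) (↑C)) grid) grid.length C := by
    apply pvShape_foldl _ _ _ _ _ _ hsh
    intro o b ho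
    exact pvStampShape pattern ph pw cr cc grid.length C o b ho
  apply List.ext_getElem
  · rw [hshape.1]
    simp [PySem.List.length_pyRange_one]
  · intro i h1 h2
    have hi : i < grid.length := by rw [← hshape.1]; exact h1
    have hrowlen : (dots.foldl (stampA pattern ph pw cr cc (↑grid.length) (↑C)) grid)[i].length = C :=
      hshape.2 _ (List.getElem_mem h1)
    apply List.ext_getElem
    · rw [hrowlen]
      simp [PySem.List.length_pyRange_one, PySem.List.getElem_pyRange_one]
    · intro j hj1 hj2
      have hj : j < C := by rw [← hrowlen]; exact hj1
      have hlhs : (dots.foldl (stampA pattern ph pw cr cc (↑grid.length) (↑C)) grid)[i][j]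
          = gget (dots.foldl (stampA pattern ph pw cr cc (↑grid.length) (↑C)) grid) (↑i) (↑j) := by
        rw [pvGget_natCast, List.getD_eq_getElem _ [] h1, List.getD_eq_getElem _ 0 hj1]
      rw [hlhs, pvStampAllGet pattern ph pw cr cc hph hpw grid.length C dots grid hsh i j hi hj]
      simp only [List.getElem_map, PySem.List.getElem_pyRange_one, zero_add]
      rw [hcell i j hi hj]

-- ===== new bridge lemmas (A-side vocabulary ⇄ B-side vocabulary) =====

theorem pvIdx_lt {n : Nat} {i : Int} {k : Nat} (h : PySem.List.pyIdx? n i = some k) : k < n := by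
  unfold PySem.List.pyIdx? at h
  split_ifs at h with h1 h2 h3 <;> simp_all <;> omega

-- indexing a materialized column with any Python index = double indexing the grid
theorem pvMapColGet (grid : List (List Int)) (cix t : Int) :
    PySem.List.pyGetD (grid.map (fun row => PySem.List.pyGetD row cix 0)) t 0
      = PySem.List.pyGetD (PySem.List.pyGetD grid t []) cix 0 := by
  simp only [PySem.List.pyGetD, PySem.List.pyGet?, List.length_map]
  cases hk : PySem.List.pyIdx? grid.length t with
  | none => simp [PySem.List.pyIdx?]
  | some k =>
    have hklt : k < grid.length := pvIdx_lt hk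
    simp [List.getElem?_eq_getElem hklt]

theorem pvFindCongr {α : Type} (l : List α) (p q : α → Bool) (h : ∀ a ∈ l, p a = q a) :
    l.find? p = l.find? q := by
  induction l with
  | nil => rfl
  | cons a t ih =>
    simp only [List.find?_cons]
    rw [h a (by simp)]
    split
    · rfl
    · exact ih (fun b hb => h b (by simp [hb]))

-- a nonempty lane is uniform iff its value set is a singleton
theorem pvSetLenOne (h : Int) (t : List Int) :
    PySem.Set.len (PySem.Set.ofList (h :: t)) = 1 ↔ (∀ v ∈ t, v = h) := by
  rw [PySem.Set.ofList_cons]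
  constructor
  · intro h1 v hv
    by_contra hne
    have hv2 : v ∈ PySem.Set.discard (PySem.Set.ofList t) h :=
      (PySem.Set.mem_discard _ _ _).mpr ⟨(PySem.Set.mem_ofList _ _).mpr hv, hne⟩
    have hlen : (PySem.Set.discard (PySem.Set.ofList t) h).length = 0 := by
      simp only [PySem.Set.len, List.length_cons] at h1
      omega
    rw [List.length_eq_zero_iff] at hlen
    simp [hlen] at hv2
  · intro hall
    have hnil : PySem.Set.discard (PySem.Set.ofList t) h = [] :=
      List.eq_nil_iff_forall_not_mem.mpr (fun v hv => by
        rcases (PySem.Set.mem_discard _ _ _).mp hv with ⟨hv1, hv2⟩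
        exact hv2 (hall v ((PySem.Set.mem_ofList _ _).mp hv1)))
    simp [PySem.Set.len, hnil]

theorem pvUniformEq (bg : Int) (l : List Int) (hl : l ≠ []) :
    uniformB bg l = decide (PySem.Set.len (PySem.Set.ofList l) = 1 ∧ PySem.List.pyGetD l 0 0 ≠ bg) := by
  rcases l with _ | ⟨h, t⟩
  · exact absurd rfl hl
  rw [uniformB, PySem.List.pyGetD_zero_cons, Bool.eq_iff_iff]
  have hs := pvSetLenOne h t
  simp only [PySem.Set.len] at hs
  simp [List.all_eq_true, hs]

-- the B-side separator search over enumerate(grid) is A's index search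
theorem pvFindRowEq (grid : List (List Int)) (bg : Int) (C : Nat) (hC : 0 < C)
    (hrect : ∀ row ∈ grid, row.length = C) :
    (PySem.List.enumerate grid 0).find? (fun p => uniformB bg p.2)
      = Option.map (fun r => (r, PySem.List.pyGetD grid r []))
          ((PySem.List.pyRange 0 (↑grid.length)).find? (condRow grid bg)) := by
  rw [PySem.List.enumerate_eq_map_pyRange grid ([] : List Int), List.find?_map, PySem.List.len_eq]
  congr 1
  apply pvFindCongr
  intro r hr
  rw [PySem.List.mem_pyRange_one] at hr
  have hrow : PySem.List.pyGetD grid r [] = grid[r.toNat]'(by omega) :=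
    PySem.List.pyGetD_eq_getElem _ _ hr.1 hr.2
  have hne : PySem.List.pyGetD grid r [] ≠ [] := by
    rw [hrow]
    intro hnil
    have := hrect _ (List.getElem_mem (by omega : r.toNat < grid.length))
    rw [hnil] at this
    simp at this
    omega
  show uniformB bg (PySem.List.pyGetD grid r []) = condRow grid bg r
  rw [pvUniformEq bg _ hne, condRow]
  rfl

-- column r-th reading: A's index-generated column list is the materialized column
theorem pvColList (grid : List (List Int)) (c : Int) :
    (PySem.List.pyRange 0 (↑grid.length)).map (fun r => gget grid r c)
      = grid.map (fun row => PySem.List.pyGetD row c 0) := by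
  have h := PySem.List.map_pyGetD_pyRange_zero' grid ([] : List Int)
  calc (PySem.List.pyRange 0 (↑grid.length)).map (fun r => gget grid r c)
      = ((PySem.List.pyRange 0 (↑grid.length)).map (fun r => PySem.List.pyGetD grid r [])).map
          (fun row => PySem.List.pyGetD row c 0) := by rw [List.map_map]; rfl
    _ = grid.map (fun row => PySem.List.pyGetD row c 0) := by rw [h]

theorem pvFindColEq (grid : List (List Int)) (bg : Int) (C : Nat) (hne : grid ≠ [])
    (hCdef : (PySem.List.pyGetD grid 0 []).length = C) :
    (PySem.List.enumerate (colLanes grid) 0).find? (fun p => uniformB bg p.2)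
      = Option.map (fun c => (c, PySem.List.pyGetD (colLanes grid) c []))
          ((PySem.List.pyRange 0 (↑C)).find? (condCol grid bg (↑grid.length))) := by
  rw [PySem.List.enumerate_eq_map_pyRange (colLanes grid) ([] : List Int), List.find?_map,
    PySem.List.len_eq]
  have hlen : (colLanes grid).length = C := by
    simp [colLanes, PySem.List.length_pyRange_one, hCdef]
  rw [hlen]
  congr 1
  apply pvFindCongr
  intro c hc
  rw [PySem.List.mem_pyRange_one] at hc
  have hcol : PySem.List.pyGetD (colLanes grid) c [] = grid.map (fun row => PySem.List.pyGetD row c 0) := by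
    rw [colLanes, PySem.List.len_eq, hCdef]
    exact PySem.List.pyGetD_map_pyRange_of_nonneg _ _ _ _ hc.1 hc.2
  have hcne : PySem.List.pyGetD (colLanes grid) c [] ≠ [] := by
    rw [hcol]
    simpa using hne
  show uniformB bg (PySem.List.pyGetD (colLanes grid) c []) = condCol grid bg (↑grid.length) c
  rw [pvUniformEq bg _ hcne, condCol, pvColList, hcol]
  have hhead : PySem.List.pyGetD (grid.map (fun row => PySem.List.pyGetD row c 0)) 0 0 = gget grid 0 c := by
    rw [pvMapColGet]
    rfl
  rw [hhead]

-- xs[:s] and xs[s+1:] of a list read off as index maps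
theorem pvTakeEq (xs : List (List Int)) (s : Int) (h0 : 0 ≤ s) (h1 : s ≤ (↑xs.length : Int)) :
    PySem.List.slice xs none (some s)
      = (PySem.List.pyRange 0 s).map (fun r => PySem.List.pyGetD xs r []) := by
  rw [PySem.List.slice_to xs h0]
  apply List.ext_getElem
  · simp [PySem.List.length_pyRange_one]; omega
  · intro k hk1 hk2
    simp only [List.getElem_take, List.getElem_map, PySem.List.getElem_pyRange_one, zero_add]
    rw [PySem.List.pyGetD_natCast, List.getD_eq_getElem]

theorem pvDropEq (xs : List (List Int)) (s : Int) (h0 : 0 ≤ s) :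
    PySem.List.slice xs (some (s + 1)) none
      = (PySem.List.pyRange (s + 1) (↑xs.length)).map (fun r => PySem.List.pyGetD xs r []) := by
  rw [PySem.List.slice_from xs (by omega : (0:Int) ≤ s + 1),
    PySem.List.map_pyGetD_pyRange' xs [] (by omega : (0:Int) ≤ s + 1)]

theorem pvLenEqOfMem (s t : List Int) (hs : s.Nodup) (ht : t.Nodup) (h : ∀ v, v ∈ s ↔ v ∈ t) :
    PySem.Set.len s = PySem.Set.len t := by
  simp only [PySem.Set.len]
  exact_mod_cast ((List.perm_ext_iff_of_nodup hs ht).mpr h).length_eq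

theorem pvRowList (grid : List (List Int)) (C : Nat) (hrect : ∀ row ∈ grid, row.length = C)
    (r : Int) (h0 : 0 ≤ r) (h1 : r < (↑grid.length : Int)) :
    (PySem.List.pyRange 0 (↑C)).map (fun c => gget grid r c) = PySem.List.pyGetD grid r [] := by
  obtain ⟨rn, rfl⟩ : ∃ n : Nat, r = ((n : Nat) : Int) := ⟨r.toNat, (Int.toNat_of_nonneg h0).symm⟩
  have hrn : rn < grid.length := by exact_mod_cast h1
  rw [PySem.List.pyGetD_eq_getElem _ _ h0 h1]
  simp only [Int.toNat_natCast]
  have hlen : grid[rn].length = C := hrect _ (List.getElem_mem hrn)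
  apply List.ext_getElem
  · simp [PySem.List.length_pyRange_one, hlen]
  · intro k hk1 hk2
    simp only [List.getElem_map, PySem.List.getElem_pyRange_one, zero_add, gget]
    rw [PySem.List.pyGetD_natCast, PySem.List.pyGetD_natCast grid,
      List.getD_eq_getElem _ _ hrn, List.getD_eq_getElem _ _ (by omega)]

-- palette over a row slice is A's distinct count
theorem pvPaletteRow (grid : List (List Int)) (bg : Int) (C : Nat)
    (hrect : ∀ row ∈ grid, row.length = C) (rng : List Int)
    (hrng : ∀ r ∈ rng, 0 ≤ r ∧ r < (↑grid.length : Int)) :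
    paletteB bg (rng.map (fun r => PySem.List.pyGetD grid r []))
      = distinctRows grid bg (↑C) rng := by
  unfold paletteB distinctRows
  apply pvLenEqOfMem _ _ (PySem.Set.nodup_ofList _) (PySem.Set.nodup_diff _ _ (PySem.Set.nodup_ofList _))
  intro v
  rw [PySem.Set.mem_ofList]
  constructor
  · intro hv
    simp only [List.mem_flatMap, List.mem_map, List.mem_filter, bne_iff_ne] at hv
    obtain ⟨lane, ⟨r, hr, rfl⟩, hvl, hvne⟩ := hv
    rw [(PySem.Set.mem_diff _ _ _)]
    constructor
    · rw [PySem.Set.mem_ofList]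
      simp only [List.mem_flatMap, List.mem_map]
      obtain ⟨h0, h1⟩ := hrng r hr
      rw [← pvRowList grid C hrect r h0 h1] at hvl
      obtain ⟨c, hc, rfl⟩ := List.mem_map.mp hvl
      exact ⟨r, hr, c, hc, rfl⟩
    · simp [PySem.Set.mem_ofList]
      exact hvne
  · intro hv
    rw [(PySem.Set.mem_diff _ _ _)] at hv
    obtain ⟨hv1, hv2⟩ := hv
    rw [PySem.Set.mem_ofList] at hv1
    simp only [PySem.Set.mem_ofList, List.mem_singleton] at hv2
    simp only [List.mem_flatMap, List.mem_map] at hv1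
    obtain ⟨r, hr, c, hc, rfl⟩ := hv1
    simp only [List.mem_flatMap, List.mem_map, List.mem_filter, bne_iff_ne]
    obtain ⟨h0, h1⟩ := hrng r hr
    refine ⟨PySem.List.pyGetD grid r [], ⟨r, hr, rfl⟩, ?_, hv2⟩
    rw [← pvRowList grid C hrect r h0 h1]
    exact List.mem_map.mpr ⟨c, hc, rfl⟩

theorem pvColMemList (grid : List (List Int)) (c : Int) (v : Int) :
    v ∈ grid.map (fun row => PySem.List.pyGetD row c 0)
      ↔ ∃ r ∈ PySem.List.pyRange 0 (↑grid.length), v = gget grid r c := by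
  constructor
  · intro hv
    obtain ⟨row, hrow, rfl⟩ := List.mem_map.mp hv
    obtain ⟨k, hk, rfl⟩ := List.mem_iff_getElem.mp hrow
    refine ⟨(↑k : Int), by rw [PySem.List.mem_pyRange_one]; omega, ?_⟩
    simp only [gget]
    rw [PySem.List.pyGetD_natCast grid, List.getD_eq_getElem _ _ hk]
  · rintro ⟨r, hr, rfl⟩
    rw [PySem.List.mem_pyRange_one] at hr
    simp only [gget]
    rw [PySem.List.pyGetD_eq_getElem _ _ hr.1 hr.2]
    exact List.mem_map.mpr ⟨_, List.getElem_mem _, rfl⟩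

theorem pvPaletteCol (grid : List (List Int)) (bg : Int) (crng : List Int) :
    paletteB bg (crng.map (fun c => grid.map (fun row => PySem.List.pyGetD row c 0)))
      = distinctCols grid bg (↑grid.length) crng := by
  unfold paletteB distinctCols
  apply pvLenEqOfMem _ _ (PySem.Set.nodup_ofList _) (PySem.Set.nodup_diff _ _ (PySem.Set.nodup_ofList _))
  intro v
  rw [PySem.Set.mem_ofList]
  constructor
  · intro hv
    simp only [List.mem_flatMap, List.mem_map, List.mem_filter, bne_iff_ne] at hv
    obtain ⟨lane, ⟨c, hc, rfl⟩, hvl, hvne⟩ := hv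
    rw [(PySem.Set.mem_diff _ _ _)]
    obtain ⟨r, hr, rfl⟩ := (pvColMemList grid c _).mp hvl
    constructor
    · rw [PySem.Set.mem_ofList]
      simp only [List.mem_flatMap, List.mem_map]
      exact ⟨r, hr, c, hc, rfl⟩
    · simp [PySem.Set.mem_ofList]
      exact hvne
  · intro hv
    rw [(PySem.Set.mem_diff _ _ _)] at hv
    obtain ⟨hv1, hv2⟩ := hv
    rw [PySem.Set.mem_ofList] at hv1
    simp only [PySem.Set.mem_ofList, List.mem_singleton] at hv2
    simp only [List.mem_flatMap, List.mem_map] at hv1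
    obtain ⟨r, hr, c, hc, rfl⟩ := hv1
    simp only [List.mem_flatMap, List.mem_map, List.mem_filter, bne_iff_ne]
    exact ⟨grid.map (fun row => PySem.List.pyGetD row c 0), ⟨c, hc, rfl⟩,
      (pvColMemList grid c _).mpr ⟨r, hr, rfl⟩, hv2⟩

theorem pvRangeSplit3 {β : Type} (a b lo hi : Int) (h1 : a ≤ lo) (h2 : lo ≤ hi) (h3 : hi ≤ b)
    (g : Int → List β) :
    (PySem.List.pyRange a b).flatMap g
      = (PySem.List.pyRange a lo).flatMap g ++ (PySem.List.pyRange lo hi).flatMap g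
        ++ (PySem.List.pyRange hi b).flatMap g := by
  rw [PySem.List.pyRange_one_append a lo b h1 (by omega), List.flatMap_append,
    PySem.List.pyRange_one_append lo hi b h2 h3, List.flatMap_append, List.append_assoc]

theorem pvFlatMapGuard {β : Type} (a b lo hi : Int) (h1 : a ≤ lo) (h2 : lo ≤ hi) (h3 : hi ≤ b)
    (g : Int → List β) :
    (PySem.List.pyRange a b).flatMap (fun r => if lo ≤ r ∧ r < hi then g r else [])
      = (PySem.List.pyRange lo hi).flatMap g := by
  rw [pvRangeSplit3 a b lo hi h1 h2 h3]
  have e1 : (PySem.List.pyRange a lo).flatMap (fun r => if lo ≤ r ∧ r < hi then g r else []) = [] := by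
    rw [List.flatMap_eq_nil_iff]
    intro r hr
    rw [PySem.List.mem_pyRange_one] at hr
    rw [if_neg (by omega)]
  have e2 : (PySem.List.pyRange hi b).flatMap (fun r => if lo ≤ r ∧ r < hi then g r else []) = [] := by
    rw [List.flatMap_eq_nil_iff]
    intro r hr
    rw [PySem.List.mem_pyRange_one] at hr
    rw [if_neg (by omega)]
  have e3 : (PySem.List.pyRange lo hi).flatMap (fun r => if lo ≤ r ∧ r < hi then g r else []) = (PySem.List.pyRange lo hi).flatMap g := by
    apply List.flatMap_congr
    intro r hr
    rw [PySem.List.mem_pyRange_one] at hr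
    rw [if_pos (by omega)]
  rw [e1, e2, e3]
  simp

theorem pvFilterGuard (a b lo hi : Int) (h1 : a ≤ lo) (h2 : lo ≤ hi) (h3 : hi ≤ b) (p : Int → Bool) :
    (PySem.List.pyRange a b).filter (fun j => p j && decide (lo ≤ j ∧ j < hi))
      = (PySem.List.pyRange lo hi).filter p := by
  rw [PySem.List.pyRange_one_append a lo b h1 (by omega), List.filter_append,
    PySem.List.pyRange_one_append lo hi b h2 h3, List.filter_append]
  have e1 : (PySem.List.pyRange a lo).filter (fun j => p j && decide (lo ≤ j ∧ j < hi)) = [] := by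
    rw [List.filter_eq_nil_iff]
    intro j hj
    rw [PySem.List.mem_pyRange_one] at hj
    simp only [Bool.and_eq_true, decide_eq_true_eq]
    omega
  have e2 : (PySem.List.pyRange hi b).filter (fun j => p j && decide (lo ≤ j ∧ j < hi)) = [] := by
    rw [List.filter_eq_nil_iff]
    intro j hj
    rw [PySem.List.mem_pyRange_one] at hj
    simp only [Bool.and_eq_true, decide_eq_true_eq]
    omega
  have e3 : (PySem.List.pyRange lo hi).filter (fun j => p j && decide (lo ≤ j ∧ j < hi))
      = (PySem.List.pyRange lo hi).filter p := by
    apply List.filter_congr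
    intro j hj
    rw [PySem.List.mem_pyRange_one] at hj
    rw [decide_eq_true (by omega : lo ≤ j ∧ j < hi), Bool.and_true]
  rw [e1, e2, e3]
  simp

-- B's dot list (row-major scan with a lane-range guard) is A's dot list
theorem pvDotsRowEq (grid : List (List Int)) (bg : Int) (C : Nat)
    (hrect : ∀ row ∈ grid, row.length = C) (c0 c1 : Int)
    (h0 : 0 ≤ c0) (h01 : c0 ≤ c1) (h1 : c1 ≤ (↑grid.length : Int)) :
    dotsB grid bg true c0 c1 = nonBgRows grid bg (↑C) (PySem.List.pyRange c0 c1) := by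
  unfold dotsB nonBgRows
  rw [PySem.List.enumerate_eq_map_pyRange grid ([] : List Int), List.flatMap_map, PySem.List.len_eq]
  simp only [if_true]
  have hstep : (PySem.List.pyRange 0 (↑grid.length)).flatMap
      (fun r => ((PySem.List.enumerate (PySem.List.pyGetD grid r []) 0).filter (fun cp =>
          cp.2 != bg && decide (c0 ≤ r ∧ r < c1))).map (fun cp => (r, cp.1)))
      = (PySem.List.pyRange 0 (↑grid.length)).flatMap (fun r =>
          if c0 ≤ r ∧ r < c1 then
            ((PySem.List.enumerate (PySem.List.pyGetD grid r []) 0).filter (fun cp =>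
              cp.2 != bg)).map (fun cp => (r, cp.1))
          else []) := by
    apply List.flatMap_congr
    intro r _
    by_cases hg : c0 ≤ r ∧ r < c1
    · rw [if_pos hg]
      congr 1
      apply List.filter_congr
      intro cp _
      rw [decide_eq_true hg, Bool.and_true]
    · rw [if_neg hg]
      rw [List.filter_eq_nil_iff.mpr (fun cp _ => by
        rw [decide_eq_false hg, Bool.and_false]; simp)]
      rfl
  rw [hstep, pvFlatMapGuard 0 (↑grid.length) c0 c1 h0 h01 h1]
  apply List.flatMap_congr
  intro r hr
  rw [PySem.List.mem_pyRange_one] at hr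
  have hrlen : (PySem.List.pyGetD grid r []).length = C := by
    rw [PySem.List.pyGetD_eq_getElem _ _ (by omega) (by omega)]
    exact hrect _ (List.getElem_mem (by omega))
  rw [PySem.List.enumerate_eq_map_pyRange (PySem.List.pyGetD grid r []) (0 : Int),
    PySem.List.len_eq, hrlen, List.filter_map, List.map_map]
  rfl

theorem pvDotsColEq (grid : List (List Int)) (bg : Int) (C : Nat)
    (hrect : ∀ row ∈ grid, row.length = C) (c0 c1 : Int)
    (h0 : 0 ≤ c0) (h01 : c0 ≤ c1) (h1 : c1 ≤ (↑C : Int)) :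
    dotsB grid bg false c0 c1 = nonBgCols grid bg (↑grid.length) (PySem.List.pyRange c0 c1) := by
  unfold dotsB nonBgCols
  rw [PySem.List.enumerate_eq_map_pyRange grid ([] : List Int), List.flatMap_map, PySem.List.len_eq]
  simp only [Bool.false_eq_true, if_false]
  apply List.flatMap_congr
  intro r hr
  rw [PySem.List.mem_pyRange_one] at hr
  have hrlen : (PySem.List.pyGetD grid r []).length = C := by
    rw [PySem.List.pyGetD_eq_getElem _ _ (by omega) (by omega)]
    exact hrect _ (List.getElem_mem (by omega))
  rw [PySem.List.enumerate_eq_map_pyRange (PySem.List.pyGetD grid r []) (0 : Int),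
    PySem.List.len_eq, hrlen, List.filter_map, List.map_map]
  show ((PySem.List.pyRange 0 (↑C)).filter
      (fun j => gget grid r j != bg && decide (c0 ≤ j ∧ j < c1))).map (fun j => (r, j))
    = ((PySem.List.pyRange c0 c1).filter (fun c => gget grid r c != bg)).map (fun c => (r, c))
  rw [pvFilterGuard 0 (↑C) c0 c1 h0 h01 h1]

-- B's per-cell gather (row case) matches A's scatter result cell by cell
theorem pvRowAssembleB (grid : List (List Int)) (C : Nat)
    (hrect : ∀ row ∈ grid, row.length = C) (P : List Int) (dots : List (Int × Int))
    (lo pw : Int) (hpw : 0 ≤ pw) :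
    dots.foldl (stampA (P.map (fun r => (PySem.List.pyRange lo (lo + pw)).map (fun c => gget grid r c)))
        (↑P.length) pw (PySem.Int.floordiv (↑P.length) 2) (PySem.Int.floordiv pw 2)
        (↑grid.length) (↑C)) grid
      = (PySem.List.pyRange 0 (↑grid.length)).map (fun r =>
          (PySem.List.pyRange 0 (↑C)).map (fun c =>
            cellB grid (P.map (fun r => PySem.List.pyGetD grid r [])) lo (↑P.length) pw true dots r c)) := by
  apply pvGatherEq _ _ _ _ _ (by positivity) hpw grid C hrect dots
  intro i j hi hj
  simp only [cellB, if_true]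
  cases hfind : dots.reverse.find? (fun d =>
      decide (0 ≤ (↑i : Int) - d.1 + PySem.Int.floordiv (↑P.length) 2 ∧
        (↑i : Int) - d.1 + PySem.Int.floordiv (↑P.length) 2 < (↑P.length : Int) ∧
        0 ≤ (↑j : Int) - d.2 + PySem.Int.floordiv pw 2 ∧
        (↑j : Int) - d.2 + PySem.Int.floordiv pw 2 < pw)) with
  | none => rfl
  | some d =>
    dsimp only
    have hcond := List.find?_some hfind
    simp only [decide_eq_true_eq] at hcond
    obtain ⟨h1, h2, h3, h4⟩ := hcond
    rw [pvPatRowLookup grid P lo pw _ _ h1 h2 h3 h4]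
    obtain ⟨an, han⟩ : ∃ n : Nat, (↑i : Int) - d.1 + PySem.Int.floordiv (↑P.length) 2 = (↑n : Int) :=
      ⟨_, (Int.toNat_of_nonneg h1).symm⟩
    rw [han] at h2 ⊢
    have hanlt : an < P.length := by exact_mod_cast h2
    rw [show PySem.List.pyGetD (P.map (fun r => PySem.List.pyGetD grid r [])) (↑an) []
          = PySem.List.pyGetD grid (P[an]'hanlt) [] from by
        rw [PySem.List.pyGetD_natCast, List.getD_eq_getElem _ _ (by simpa using hanlt), List.getElem_map],
      show PySem.List.pyGetD P (↑an) 0 = P[an]'hanlt from by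
        rw [PySem.List.pyGetD_natCast, List.getD_eq_getElem _ _ hanlt]]
    rfl

-- B's per-cell gather (column case): the lane axis and the cross axis swap places
theorem pvColAssembleB (grid : List (List Int)) (C : Nat)
    (hrect : ∀ row ∈ grid, row.length = C) (P : List Int) (dots : List (Int × Int))
    (lo ph : Int) (hph : 0 ≤ ph) :
    dots.foldl (stampA ((PySem.List.pyRange lo (lo + ph)).map (fun r => P.map (fun c => gget grid r c)))
        ph (↑P.length) (PySem.Int.floordiv ph 2) (PySem.Int.floordiv (↑P.length) 2)
        (↑grid.length) (↑C)) grid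
      = (PySem.List.pyRange 0 (↑grid.length)).map (fun r =>
          (PySem.List.pyRange 0 (↑C)).map (fun c =>
            cellB grid (P.map (fun cix => grid.map (fun row => PySem.List.pyGetD row cix 0)))
              lo (↑P.length) ph false dots r c)) := by
  apply pvGatherEq _ _ _ _ _ hph (by positivity) grid C hrect dots
  intro i j hi hj
  simp only [cellB, Bool.false_eq_true, if_false]
  have hpred : (fun d : Int × Int =>
      decide (0 ≤ (↑j : Int) - d.2 + PySem.Int.floordiv (↑P.length) 2 ∧
        (↑j : Int) - d.2 + PySem.Int.floordiv (↑P.length) 2 < (↑P.length : Int) ∧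
        0 ≤ (↑i : Int) - d.1 + PySem.Int.floordiv ph 2 ∧
        (↑i : Int) - d.1 + PySem.Int.floordiv ph 2 < ph))
      = (fun d : Int × Int =>
      decide (0 ≤ (↑i : Int) - d.1 + PySem.Int.floordiv ph 2 ∧
        (↑i : Int) - d.1 + PySem.Int.floordiv ph 2 < ph ∧
        0 ≤ (↑j : Int) - d.2 + PySem.Int.floordiv (↑P.length) 2 ∧
        (↑j : Int) - d.2 + PySem.Int.floordiv (↑P.length) 2 < (↑P.length : Int))) := by
    funext d
    rw [decide_eq_decide]
    tauto
  rw [hpred]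
  cases hfind : dots.reverse.find? (fun d =>
      decide (0 ≤ (↑i : Int) - d.1 + PySem.Int.floordiv ph 2 ∧
        (↑i : Int) - d.1 + PySem.Int.floordiv ph 2 < ph ∧
        0 ≤ (↑j : Int) - d.2 + PySem.Int.floordiv (↑P.length) 2 ∧
        (↑j : Int) - d.2 + PySem.Int.floordiv (↑P.length) 2 < (↑P.length : Int))) with
  | none => rfl
  | some d =>
    dsimp only
    have hcond := List.find?_some hfind
    simp only [decide_eq_true_eq] at hcond
    obtain ⟨h1, h2, h3, h4⟩ := hcond
    rw [pvPatColLookup grid P lo ph _ _ h1 h2 h3 h4]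
    obtain ⟨an, han⟩ : ∃ n : Nat, (↑j : Int) - d.2 + PySem.Int.floordiv (↑P.length) 2 = (↑n : Int) :=
      ⟨_, (Int.toNat_of_nonneg h3).symm⟩
    rw [han] at h4 ⊢
    have hanlt : an < P.length := by exact_mod_cast h4
    rw [show PySem.List.pyGetD (P.map (fun cix => grid.map (fun row => PySem.List.pyGetD row cix 0))) (↑an) []
          = grid.map (fun row => PySem.List.pyGetD row (P[an]'hanlt) 0) from by
        rw [PySem.List.pyGetD_natCast, List.getD_eq_getElem _ _ (by simpa using hanlt), List.getElem_map],
      pvMapColGet,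
      show PySem.List.pyGetD P (↑an) 0 = P[an]'hanlt from by
        rw [PySem.List.pyGetD_natCast, List.getD_eq_getElem _ _ hanlt]]
    rfl

-- slices of the materialized column list
theorem pvTakeMapEq (F : Int → List Int) (C : Nat) (s : Int) (h0 : 0 ≤ s) (h1 : s ≤ (↑C : Int)) :
    PySem.List.slice ((PySem.List.pyRange 0 (↑C)).map F) none (some s)
      = (PySem.List.pyRange 0 s).map F := by
  rw [PySem.List.slice_to _ h0, PySem.List.pyRange_one_append 0 s (↑C) h0 h1, List.map_append,
    List.take_left' (by simp [PySem.List.length_pyRange_one])]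

theorem pvDropMapEq (F : Int → List Int) (C : Nat) (s : Int) (h0 : 0 ≤ s) (h1 : s + 1 ≤ (↑C : Int)) :
    PySem.List.slice ((PySem.List.pyRange 0 (↑C)).map F) (some (s + 1)) none
      = (PySem.List.pyRange (s + 1) (↑C)).map F := by
  rw [PySem.List.slice_from _ (by omega : (0:Int) ≤ s + 1),
    PySem.List.pyRange_one_append 0 (s + 1) (↑C) (by omega) h1, List.map_append,
    List.drop_left' (by simp [PySem.List.length_pyRange_one])]

theorem pvRowBranchEqB (grid : List (List Int)) (bg sr : Int) (C : Nat)
    (hrect : ∀ row ∈ grid, row.length = C) (hCdef : (PySem.List.pyGetD grid 0 []).length = C)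
    (hsr0 : 0 ≤ sr) (hsr : sr < (↑grid.length : Int)) :
    rowBranchA grid bg sr (↑grid.length) (↑C) grid = stampB grid bg grid true sr := by
  simp only [rowBranchA, stampB, halvesRow, PySem.List.len_eq, hCdef]
  have hb1 : ∀ r ∈ PySem.List.pyRange 0 sr, 0 ≤ r ∧ r < (↑grid.length : Int) :=
    fun r hr => by rw [PySem.List.mem_pyRange_one] at hr; omega
  have hb2 : ∀ r ∈ PySem.List.pyRange (sr + 1) (↑grid.length), 0 ≤ r ∧ r < (↑grid.length : Int) :=
    fun r hr => by rw [PySem.List.mem_pyRange_one] at hr; omega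
  rw [pvTakeEq grid sr hsr0 (le_of_lt hsr), pvDropEq grid sr hsr0,
    pvPaletteRow grid bg C hrect (PySem.List.pyRange 0 sr) hb1,
    pvPaletteRow grid bg C hrect (PySem.List.pyRange (sr + 1) (↑grid.length)) hb2]
  by_cases hcmp : distinctRows grid bg (↑C) (PySem.List.pyRange (sr + 1) (↑grid.length))
      ≤ distinctRows grid bg (↑C) (PySem.List.pyRange 0 sr)
  · simp only [if_pos hcmp]
    simp only [List.length_map]
    set P := PySem.List.pyRange 0 sr with hP
    have hoccEq : (PySem.List.pyRange 0 (↑C)).filter (fun k =>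
        (P.map (fun r => PySem.List.pyGetD grid r [])).any (fun lane => PySem.List.pyGetD lane k 0 != bg))
        = occRow grid bg (↑C) P := by
      unfold occRow
      exact List.filter_congr (fun k _ => by rw [List.any_map]; rfl)
    rw [hoccEq]
    have hmin := pvMinHead ((nonBgRows grid bg (↑C) P).map (·.2)) (occRow grid bg (↑C) P)
      (pvMemNonBgRow grid bg C P) (pvOccRowPairwise grid bg C P)
    have hmax := pvMaxLast ((nonBgRows grid bg (↑C) P).map (·.2)) (occRow grid bg (↑C) P)
      (pvMemNonBgRow grid bg C P) (pvOccRowPairwise grid bg C P)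
    rw [hmin, hmax]
    set m := PySem.List.pyGetD (occRow grid bg (↑C) P) 0 0 with hm
    set M := PySem.List.pyGetD (occRow grid bg (↑C) P) (-1) 0 with hM2
    have hfix : (if M - m + 1 < (↑P.length : Int) then
          if m + (↑P.length : Int) - 1 < (↑C : Int) then (m, (↑P.length : Int))
          else (M - (↑P.length : Int) + 1, (↑P.length : Int))
        else (m, M - m + 1))
        = (if M - m + 1 < (↑P.length : Int) ∧ (↑C : Int) ≤ m + (↑P.length : Int) - 1
             then M - (↑P.length : Int) + 1 else m,
           if M - m + 1 < (↑P.length : Int) then (↑P.length : Int) else M - m + 1) := by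
      split_ifs <;> first | rfl | (exfalso; omega)
    rw [hfix]
    dsimp only
    rw [pvDotsRowEq grid bg C hrect (sr + 1) (↑grid.length) (by omega) (by omega) (by omega)]
    exact pvRowAssembleB grid C hrect P
      (nonBgRows grid bg (↑C) (PySem.List.pyRange (sr + 1) (↑grid.length)))
      (if M - m + 1 < (↑P.length : Int) ∧ (↑C : Int) ≤ m + (↑P.length : Int) - 1
        then M - (↑P.length : Int) + 1 else m)
      (if M - m + 1 < (↑P.length : Int) then (↑P.length : Int) else M - m + 1)
      (by split_ifs with h
          · positivity
          · omega)
  · simp only [if_neg hcmp]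
    simp only [List.length_map]
    set P := PySem.List.pyRange (sr + 1) (↑grid.length) with hP
    have hoccEq : (PySem.List.pyRange 0 (↑C)).filter (fun k =>
        (P.map (fun r => PySem.List.pyGetD grid r [])).any (fun lane => PySem.List.pyGetD lane k 0 != bg))
        = occRow grid bg (↑C) P := by
      unfold occRow
      exact List.filter_congr (fun k _ => by rw [List.any_map]; rfl)
    rw [hoccEq]
    have hmin := pvMinHead ((nonBgRows grid bg (↑C) P).map (·.2)) (occRow grid bg (↑C) P)
      (pvMemNonBgRow grid bg C P) (pvOccRowPairwise grid bg C P)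
    have hmax := pvMaxLast ((nonBgRows grid bg (↑C) P).map (·.2)) (occRow grid bg (↑C) P)
      (pvMemNonBgRow grid bg C P) (pvOccRowPairwise grid bg C P)
    rw [hmin, hmax]
    set m := PySem.List.pyGetD (occRow grid bg (↑C) P) 0 0 with hm
    set M := PySem.List.pyGetD (occRow grid bg (↑C) P) (-1) 0 with hM2
    have hfix : (if M - m + 1 < (↑P.length : Int) then
          if m + (↑P.length : Int) - 1 < (↑C : Int) then (m, (↑P.length : Int))
          else (M - (↑P.length : Int) + 1, (↑P.length : Int))
        else (m, M - m + 1))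
        = (if M - m + 1 < (↑P.length : Int) ∧ (↑C : Int) ≤ m + (↑P.length : Int) - 1
             then M - (↑P.length : Int) + 1 else m,
           if M - m + 1 < (↑P.length : Int) then (↑P.length : Int) else M - m + 1) := by
      split_ifs <;> first | rfl | (exfalso; omega)
    rw [hfix]
    dsimp only
    rw [pvDotsRowEq grid bg C hrect 0 sr (by omega) (by omega) (by omega)]
    exact pvRowAssembleB grid C hrect P
      (nonBgRows grid bg (↑C) (PySem.List.pyRange 0 sr))
      (if M - m + 1 < (↑P.length : Int) ∧ (↑C : Int) ≤ m + (↑P.length : Int) - 1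
        then M - (↑P.length : Int) + 1 else m)
      (if M - m + 1 < (↑P.length : Int) then (↑P.length : Int) else M - m + 1)
      (by split_ifs with h
          · positivity
          · omega)

theorem pvColBranchEqB (grid : List (List Int)) (bg sc : Int) (C : Nat) (hC : 0 < C)
    (hrect : ∀ row ∈ grid, row.length = C) (hCdef : (PySem.List.pyGetD grid 0 []).length = C)
    (hsc0 : 0 ≤ sc) (hsc : sc < (↑C : Int)) :
    colBranchA grid bg sc (↑grid.length) (↑C) grid = stampB grid bg (colLanes grid) false sc := by
  have hm0 : PySem.List.pyGetD ((PySem.List.pyRange 0 ((↑C : Int))).map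
        (fun k => grid.map (fun row => PySem.List.pyGetD row k 0))) 0 []
      = grid.map (fun row => PySem.List.pyGetD row 0 0) :=
    PySem.List.pyGetD_map_pyRange_of_nonneg _ _ _ _ le_rfl (by exact_mod_cast hC)
  have hlens : ((PySem.List.pyRange 0 ((↑C : Int))).map
      (fun k => grid.map (fun row => PySem.List.pyGetD row k 0))).length = C := by
    simp [PySem.List.length_pyRange_one]
  simp only [colBranchA, stampB, halvesCol, colLanes, PySem.List.len_eq, hCdef, hlens, hm0,
    List.length_map]
  rw [pvTakeMapEq _ C sc hsc0 (le_of_lt hsc), pvDropMapEq _ C sc hsc0 (by omega),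
    pvPaletteCol grid bg (PySem.List.pyRange 0 sc),
    pvPaletteCol grid bg (PySem.List.pyRange (sc + 1) (↑C))]
  by_cases hcmp : distinctCols grid bg (↑grid.length) (PySem.List.pyRange (sc + 1) (↑C))
      ≤ distinctCols grid bg (↑grid.length) (PySem.List.pyRange 0 sc)
  · simp only [if_pos hcmp]
    simp only [List.length_map]
    set P := PySem.List.pyRange 0 sc with hP
    have hoccEq : (PySem.List.pyRange 0 (↑grid.length)).filter (fun k =>
        (P.map (fun cix => grid.map (fun row => PySem.List.pyGetD row cix 0))).any
          (fun lane => PySem.List.pyGetD lane k 0 != bg))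
        = occCol grid bg (↑grid.length) P := by
      unfold occCol
      apply List.filter_congr
      intro k _
      rw [List.any_map]
      have hfun : ((fun lane => PySem.List.pyGetD lane k 0 != bg)
            ∘ fun cix => grid.map (fun row => PySem.List.pyGetD row cix 0))
          = (fun c => gget grid k c != bg) := by
        funext c
        simp only [Function.comp_apply]
        rw [pvMapColGet]
        rfl
      rw [hfun]
    rw [hoccEq]
    have hmin := pvMinHead ((nonBgCols grid bg (↑grid.length) P).map (·.1)) (occCol grid bg (↑grid.length) P)
      (pvMemNonBgCol grid bg grid.length P) (pvOccColPairwise grid bg grid.length P)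
    have hmax := pvMaxLast ((nonBgCols grid bg (↑grid.length) P).map (·.1)) (occCol grid bg (↑grid.length) P)
      (pvMemNonBgCol grid bg grid.length P) (pvOccColPairwise grid bg grid.length P)
    rw [hmin, hmax]
    set m := PySem.List.pyGetD (occCol grid bg (↑grid.length) P) 0 0 with hm
    set M := PySem.List.pyGetD (occCol grid bg (↑grid.length) P) (-1) 0 with hM2
    have hfix : (if M - m + 1 < (↑P.length : Int) then
          if m + (↑P.length : Int) - 1 < (↑grid.length : Int) then (m, (↑P.length : Int))
          else (M - (↑P.length : Int) + 1, (↑P.length : Int))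
        else (m, M - m + 1))
        = (if M - m + 1 < (↑P.length : Int) ∧ (↑grid.length : Int) ≤ m + (↑P.length : Int) - 1
             then M - (↑P.length : Int) + 1 else m,
           if M - m + 1 < (↑P.length : Int) then (↑P.length : Int) else M - m + 1) := by
      split_ifs <;> first | rfl | (exfalso; omega)
    rw [hfix]
    dsimp only
    rw [pvDotsColEq grid bg C hrect (sc + 1) (↑C) (by omega) (by omega) (by omega)]
    exact pvColAssembleB grid C hrect P
      (nonBgCols grid bg (↑grid.length) (PySem.List.pyRange (sc + 1) (↑C)))
      (if M - m + 1 < (↑P.length : Int) ∧ (↑grid.length : Int) ≤ m + (↑P.length : Int) - 1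
        then M - (↑P.length : Int) + 1 else m)
      (if M - m + 1 < (↑P.length : Int) then (↑P.length : Int) else M - m + 1)
      (by split_ifs with h
          · positivity
          · omega)
  · simp only [if_neg hcmp]
    simp only [List.length_map]
    set P := PySem.List.pyRange (sc + 1) (↑C) with hP
    have hoccEq : (PySem.List.pyRange 0 (↑grid.length)).filter (fun k =>
        (P.map (fun cix => grid.map (fun row => PySem.List.pyGetD row cix 0))).any
          (fun lane => PySem.List.pyGetD lane k 0 != bg))
        = occCol grid bg (↑grid.length) P := by
      unfold occCol
      apply List.filter_congr
      intro k _
      rw [List.any_map]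
      have hfun : ((fun lane => PySem.List.pyGetD lane k 0 != bg)
            ∘ fun cix => grid.map (fun row => PySem.List.pyGetD row cix 0))
          = (fun c => gget grid k c != bg) := by
        funext c
        simp only [Function.comp_apply]
        rw [pvMapColGet]
        rfl
      rw [hfun]
    rw [hoccEq]
    have hmin := pvMinHead ((nonBgCols grid bg (↑grid.length) P).map (·.1)) (occCol grid bg (↑grid.length) P)
      (pvMemNonBgCol grid bg grid.length P) (pvOccColPairwise grid bg grid.length P)
    have hmax := pvMaxLast ((nonBgCols grid bg (↑grid.length) P).map (·.1)) (occCol grid bg (↑grid.length) P)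
      (pvMemNonBgCol grid bg grid.length P) (pvOccColPairwise grid bg grid.length P)
    rw [hmin, hmax]
    set m := PySem.List.pyGetD (occCol grid bg (↑grid.length) P) 0 0 with hm
    set M := PySem.List.pyGetD (occCol grid bg (↑grid.length) P) (-1) 0 with hM2
    have hfix : (if M - m + 1 < (↑P.length : Int) then
          if m + (↑P.length : Int) - 1 < (↑grid.length : Int) then (m, (↑P.length : Int))
          else (M - (↑P.length : Int) + 1, (↑P.length : Int))
        else (m, M - m + 1))
        = (if M - m + 1 < (↑P.length : Int) ∧ (↑grid.length : Int) ≤ m + (↑P.length : Int) - 1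
             then M - (↑P.length : Int) + 1 else m,
           if M - m + 1 < (↑P.length : Int) then (↑P.length : Int) else M - m + 1) := by
      split_ifs <;> first | rfl | (exfalso; omega)
    rw [hfix]
    dsimp only
    rw [pvDotsColEq grid bg C hrect 0 sc (by omega) (by omega) (by omega)]
    exact pvColAssembleB grid C hrect P
      (nonBgCols grid bg (↑grid.length) (PySem.List.pyRange 0 sc))
      (if M - m + 1 < (↑P.length : Int) ∧ (↑grid.length : Int) ≤ m + (↑P.length : Int) - 1
        then M - (↑P.length : Int) + 1 else m)
      (if M - m + 1 < (↑P.length : Int) then (↑P.length : Int) else M - m + 1)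
      (by split_ifs with h
          · positivity
          · omega)

-- ===== VERDICT (by name: the statement is the Claim_ definition above) =====
theorem transform_spec : Claim_equal_transform := by
  intro grid hdom hpre
  obtain ⟨hne, h0, hrect, hsep⟩ := hpre
  unfold Spec_transform
  simp only [transform, transform_alt]
  rw [PySem.List.len_eq grid, PySem.List.len_eq (PySem.List.pyGetD grid 0 [])]
  rw [pvFoldlBreak, pvFoldlBreak]
  rw [pvFlatEq grid (PySem.List.pyGetD grid 0 []).length hrect]
  rw [pvOut0]
  have hC : 0 < (PySem.List.pyGetD grid 0 []).length := List.length_pos_iff.mpr h0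
  rw [pvFindRowEq grid _ _ hC hrect, pvFindColEq grid _ _ hne rfl]
  cases hfr : (PySem.List.pyRange 0 (↑grid.length)).find?
      (condRow grid (bgFromFlat (grid.flatMap fun row => row))) with
  | some sr =>
    simp only [Option.map_some]
    have hmem := List.mem_of_find?_eq_some hfr
    rw [PySem.List.mem_pyRange_one] at hmem
    exact pvRowBranchEqB grid _ sr _ hrect rfl hmem.1 hmem.2
  | none =>
    simp only [Option.map_none]
    cases hfc : (PySem.List.pyRange 0 (↑(PySem.List.pyGetD grid 0 []).length)).find?
        (condCol grid (bgFromFlat (grid.flatMap fun row => row)) (↑grid.length)) with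
    | some sc =>
      simp only [Option.map_some]
      have hmem := List.mem_of_find?_eq_some hfc
      rw [PySem.List.mem_pyRange_one] at hmem
      exact pvColBranchEqB grid _ sc _ hC hrect rfl hmem.1 hmem.2
    | none => simp
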